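-- pv_equiv track=rewrite | github.com/viroovr/baekjoon | Platinum/Platinum IV/5852.py | label_islands
-- ===== SOURCE A (Python) =====
-- from collections import deque
--
-- def label_islands(R, C, grids):
--     directions = [(-1, 0), (1, 0), (0, -1), (0, 1)]
--     label = [[0] * C for _ in range(R)]
--     idx = 1
--
--     for r in range(R):
--         for c in range(C):
--             if grids[r][c] == "X" and label[r][c] == 0:
--                 q = deque([(r, c)])
--                 label[r][c] = idx
--                 while q:
--                     r_, c_ = q.popleft()
--                     for dr, dc in directions:
--                         nr, nc = r_ + dr, c_ + dc
--                         if 0 <= nr < R and 0 <= nc < C and grids[nr][nc] == "X" and label[nr][nc] == 0: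
--                             label[nr][nc] = idx
--                             q.append((nr, nc))
--                 idx += 1
--
--     return label, idx - 1
-- ===== SOURCE B (Python) =====
-- def label_islands(R, C, grids):
--     # Min-label propagation (Jacobi relaxation) instead of per-component BFS:
--     # seed each 'X' cell with its row-major index+1, repeatedly replace each
--     # cell by the min over itself and its 'X' neighbours until a fixpoint,
--     # then relabel the distinct fixpoint values 1..k in row-major first-seen order.
--     cur = [[(r * C + c + 1) if grids[r][c] == "X" else 0 for c in range(C)] for r in range(R)]
--     while True:
--         nxt = []
--         for r in range(R):
--             row = []
--             for c in range(C):
--                 v = cur[r][c]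
--                 if v:
--                     for nr, nc in ((r - 1, c), (r + 1, c), (r, c - 1), (r, c + 1)):
--                         if 0 <= nr < R and 0 <= nc < C and cur[nr][nc]:
--                             v = min(v, cur[nr][nc])
--                 row.append(v)
--             nxt.append(row)
--         if nxt == cur:
--             break
--         cur = nxt
--     labels = {}
--     out = []
--     for r in range(R):
--         row = []
--         for c in range(C):
--             v = cur[r][c]
--             if v:
--                 if v not in labels:
--                     labels[v] = len(labels) + 1
--                 row.append(labels[v])
--             else:
--                 row.append(0)
--         out.append(row)
--     return out, len(labels)
-- ===== Notes on version B (the rewrite author's own statement) =====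
-- stated objective: alternative
-- what changed: Replaces the per-component BFS flood fill with a deque by whole-grid minimum-label propagation (each X cell seeded with its row-major index, repeatedly relaxed to the minimum over itself and its X neighbours until a fixpoint) followed by one row-major relabelling pass through a dict, so labels 1..k appear in the same first-encounter order.
import Mathlib
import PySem

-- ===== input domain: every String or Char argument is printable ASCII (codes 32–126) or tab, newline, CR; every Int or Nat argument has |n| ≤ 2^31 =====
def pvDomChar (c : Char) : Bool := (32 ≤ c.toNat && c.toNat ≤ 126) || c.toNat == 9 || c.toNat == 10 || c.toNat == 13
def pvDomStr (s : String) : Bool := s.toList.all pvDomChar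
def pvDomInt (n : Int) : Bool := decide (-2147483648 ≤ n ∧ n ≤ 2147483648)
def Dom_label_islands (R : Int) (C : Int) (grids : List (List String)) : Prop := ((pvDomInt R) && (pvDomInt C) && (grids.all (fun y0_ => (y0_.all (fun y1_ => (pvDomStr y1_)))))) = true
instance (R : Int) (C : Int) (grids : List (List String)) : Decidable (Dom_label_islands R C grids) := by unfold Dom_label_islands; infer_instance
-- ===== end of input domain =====

-- B replaces A's per-component deque BFS by whole-grid minimum-label propagation to a
-- fixpoint plus one row-major relabelling pass (a different algorithm, not claimed faster).

-- ===== PORT A =====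
-- shared 2D-list primitives (both Pythons read/write label[r][c]; indices are always in range where used)
def pvGet2 {α : Type} (g : List (List α)) (r c : Int) : Option α :=
  (PySem.List.pyGet? g r).bind (fun row => PySem.List.pyGet? row c)

-- label[r][c] = v ; exact for the in-range nonnegative indices both programs use
def pvSet2 (g : List (List Int)) (r c : Int) (v : Int) : List (List Int) :=
  PySem.List.pySetD g r (PySem.List.pySetD (PySem.List.pyGetD g r []) c v)

def pvDirs : List (Int × Int) := [(-1, 0), (1, 0), (0, -1), (0, 1)]

-- body of A's 'for dr, dc in directions:' loop
def pvBfsStep (R C : Int) (grids : List (List String)) (idx : Int) (p : Int × Int)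
    (st : List (List Int) × List (Int × Int)) (d : Int × Int) :
    List (List Int) × List (Int × Int) :=
  let nr := p.1 + d.1
  let nc := p.2 + d.2
  if 0 ≤ nr ∧ nr < R ∧ 0 ≤ nc ∧ nc < C ∧ pvGet2 grids nr nc = some "X" ∧
      pvGet2 st.1 nr nc = some 0 then
    (pvSet2 st.1 nr nc idx, st.2 ++ [(nr, nc)])
  else st

-- the 'while q:' BFS loop of A; fuel is a totality guard only (proved sufficient below)
def pvBfs (R C : Int) (grids : List (List String)) (idx : Int) :
    Nat → List (List Int) → List (Int × Int) → List (List Int)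
  | 0, label, _ => label
  | fuel + 1, label, q =>
    match q with
    | [] => label
    | p :: q' =>
      let st := pvDirs.foldl (pvBfsStep R C grids idx p) (label, q')
      pvBfs R C grids idx fuel st.1 st.2

-- body of A's outer 'if grids[r][c] == "X" and label[r][c] == 0:' per-cell scan
def pvScanStep (R C : Int) (grids : List (List String)) (r : Int)
    (st : List (List Int) × Int) (c : Int) : List (List Int) × Int :=
  if pvGet2 grids r c = some "X" ∧ pvGet2 st.1 r c = some 0 then
    (pvBfs R C grids st.2 (5 * (R.toNat * C.toNat) + 2) (pvSet2 st.1 r c st.2) [(r, c)],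
     st.2 + 1)
  else st

def label_islands (R : Int) (C : Int) (grids : List (List String)) : List (List Int) × Int :=
  let label0 : List (List Int) :=
    (PySem.List.pyRange 0 R 1).map (fun _ => (PySem.List.pyRange 0 C 1).map (fun _ => (0 : Int)))
  let fin := (PySem.List.pyRange 0 R 1).foldl (fun (st : List (List Int) × Int) r =>
      (PySem.List.pyRange 0 C 1).foldl (pvScanStep R C grids r) st) (label0, 1)
  (fin.1, fin.2 - 1)

-- ===== PORT B =====
def pvNbrs (r c : Int) : List (Int × Int) := [(r - 1, c), (r + 1, c), (r, c - 1), (r, c + 1)]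

-- body of B's 'for nr, nc in ...: v = min(v, cur[nr][nc])' loop
def pvMinStep (R C : Int) (cur : List (List Int)) (v : Int) (q : Int × Int) : Int :=
  if 0 ≤ q.1 ∧ q.1 < R ∧ 0 ≤ q.2 ∧ q.2 < C ∧ (pvGet2 cur q.1 q.2).getD 0 ≠ 0 then
    min v ((pvGet2 cur q.1 q.2).getD 0)
  else v

-- one Jacobi sweep: each nonzero cell becomes the min of itself and its nonzero neighbours
def pvSweep (R C : Int) (cur : List (List Int)) : List (List Int) :=
  (PySem.List.pyRange 0 R 1).map (fun r =>
    (PySem.List.pyRange 0 C 1).map (fun c =>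
      let v := (pvGet2 cur r c).getD 0
      if v ≠ 0 then (pvNbrs r c).foldl (pvMinStep R C cur) v
      else v))

def pvSumNat (g : List (List Int)) : Nat := (g.map (fun row => (row.map Int.toNat).sum)).sum

-- the 'while True:' loop of B; fuel is a totality guard only (proved sufficient below)
def pvPropagate (R C : Int) : Nat → List (List Int) → List (List Int)
  | 0, cur => cur
  | fuel + 1, cur =>
    let nxt := pvSweep R C cur
    if nxt = cur then cur else pvPropagate R C fuel nxt

-- body of B's relabelling 'for c in range(C):' loop: look v up, inserting a fresh label if new
def pvRelabelStep (cur : List (List Int)) (r : Int)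
    (st2 : List Int × PySem.Dict Int Int) (c : Int) : List Int × PySem.Dict Int Int :=
  let v := (pvGet2 cur r c).getD 0
  if v ≠ 0 then
    match st2.2.get? v with
    | some l => (st2.1 ++ [l], st2.2)
    | none => (st2.1 ++ [(st2.2.size : Int) + 1], st2.2.insert v ((st2.2.size : Int) + 1))
  else (st2.1 ++ [(0 : Int)], st2.2)

-- body of B's relabelling 'for r in range(R):' loop: relabel one row, append it
def pvRelabelRow (C : Int) (cur : List (List Int))
    (st : List (List Int) × PySem.Dict Int Int) (r : Int) :
    List (List Int) × PySem.Dict Int Int :=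
  let inner := (PySem.List.pyRange 0 C 1).foldl (pvRelabelStep cur r) (([] : List Int), st.2)
  (st.1 ++ [inner.1], inner.2)

def label_islands_alt (R : Int) (C : Int) (grids : List (List String)) : List (List Int) × Int :=
  let cur0 : List (List Int) :=
    (PySem.List.pyRange 0 R 1).map (fun r =>
      (PySem.List.pyRange 0 C 1).map (fun c =>
        if pvGet2 grids r c = some "X" then r * C + c + 1 else 0))
  let cur := pvPropagate R C (pvSumNat cur0 + 1) cur0
  let fin := (PySem.List.pyRange 0 R 1).foldl (pvRelabelRow C cur)
      (([] : List (List Int)), PySem.Dict.empty)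
  (fin.1, (fin.2.size : Int))

-- ===== PRECONDITION & SPEC =====
-- Pre_ excludes exactly the inputs where Python A raises IndexError: a positive R×C scan
-- over a grids whose first R rows do not all provide at least C entries.
def Pre_label_islands (R : Int) (C : Int) (grids : List (List String)) : Prop :=
  (0 < R ∧ 0 < C) →
    (R ≤ (grids.length : Int) ∧ ∀ row ∈ grids.take R.toNat, C ≤ (row.length : Int))
instance (R : Int) (C : Int) (grids : List (List String)) :
    Decidable (Pre_label_islands R C grids) := by unfold Pre_label_islands; infer_instance

def pvWitness_label_islands : Int × Int × List (List String) :=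
  (2, 2, [["X", "."], ["X", "X"]])

def Spec_label_islands (R : Int) (C : Int) (grids : List (List String)) (out : List (List Int) × Int) : Prop := out = label_islands_alt R C grids
instance (R : Int) (C : Int) (grids : List (List String)) (out : List (List Int) × Int) : Decidable (Spec_label_islands R C grids out) := by unfold Spec_label_islands; infer_instance

-- ===== CLAIM (what is proved, stated in full; the proofs are below) =====
def Claim_equal_label_islands : Prop := ∀ (R : Int) (C : Int) (grids : List (List String)), Dom_label_islands R C grids → Pre_label_islands R C grids → Spec_label_islands R C grids (label_islands R C grids)

-- ===== LEMMAS AND PROOFS =====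

-- ---------- basic geometry ----------
def pvGood (R C : Int) (grids : List (List String)) (p : Int × Int) : Prop :=
  0 ≤ p.1 ∧ p.1 < R ∧ 0 ≤ p.2 ∧ p.2 < C ∧ pvGet2 grids p.1 p.2 = some "X"

def pvAdj (p q : Int × Int) : Prop := q ∈ pvNbrs p.1 p.2

def pvStep (R C : Int) (grids : List (List String)) (p q : Int × Int) : Prop :=
  pvGood R C grids p ∧ pvGood R C grids q ∧ pvAdj p q

def pvReach (R C : Int) (grids : List (List String)) (s p : Int × Int) : Prop :=
  pvGood R C grids s ∧ Relation.ReflTransGen (pvStep R C grids) s p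

lemma pvAdj_symm {p q : Int × Int} (h : pvAdj p q) : pvAdj q p := by
  rcases p with ⟨a, b⟩; rcases q with ⟨x, y⟩
  simp only [pvAdj, pvNbrs, List.mem_cons, List.not_mem_nil, or_false,
    Prod.mk.injEq] at h ⊢
  omega

lemma pvAdj_of_dir {p : Int × Int} {d : Int × Int} (hd : d ∈ pvDirs) :
    pvAdj p (p.1 + d.1, p.2 + d.2) := by
  rcases p with ⟨a, b⟩
  simp only [pvDirs, List.mem_cons, List.not_mem_nil, or_false] at hd
  rcases hd with h | h | h | h <;> subst h <;>
    (simp only [pvAdj, pvNbrs, List.mem_cons, List.not_mem_nil, or_false, Prod.mk.injEq]) <;>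
    simp <;> omega

lemma pvAdj_iff_dir {p q : Int × Int} :
    pvAdj p q ↔ ∃ d ∈ pvDirs, q = (p.1 + d.1, p.2 + d.2) := by
  constructor
  · intro h
    rcases p with ⟨a, b⟩; rcases q with ⟨x, y⟩
    simp only [pvAdj, pvNbrs, List.mem_cons, List.not_mem_nil, or_false,
      Prod.mk.injEq] at h
    simp only [pvDirs, List.mem_cons, List.not_mem_nil, or_false]
    rcases h with ⟨h1, h2⟩ | ⟨h1, h2⟩ | ⟨h1, h2⟩ | ⟨h1, h2⟩
    · exact ⟨(-1, 0), Or.inl rfl, by simp only [Prod.mk.injEq]; constructor <;> omega⟩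
    · exact ⟨(1, 0), Or.inr (Or.inl rfl), by simp only [Prod.mk.injEq]; constructor <;> omega⟩
    · exact ⟨(0, -1), Or.inr (Or.inr (Or.inl rfl)), by simp only [Prod.mk.injEq]; constructor <;> omega⟩
    · exact ⟨(0, 1), Or.inr (Or.inr (Or.inr rfl)), by simp only [Prod.mk.injEq]; constructor <;> omega⟩
  · rintro ⟨d, hd, rfl⟩; exact pvAdj_of_dir hd

lemma pvStep_symm {R C : Int} {grids : List (List String)} :
    Symmetric (pvStep R C grids) := by
  rintro p q ⟨h1, h2, h3⟩; exact ⟨h2, h1, pvAdj_symm h3⟩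

lemma pvReach_refl {R C : Int} {grids : List (List String)} {s : Int × Int}
    (h : pvGood R C grids s) : pvReach R C grids s s :=
  ⟨h, Relation.ReflTransGen.refl⟩

lemma pvGood_of_reach {R C : Int} {grids : List (List String)} {s p : Int × Int}
    (h : pvReach R C grids s p) : pvGood R C grids p := by
  rcases h with ⟨hs, ht⟩
  induction ht with
  | refl => exact hs
  | tail _ hstep _ => exact hstep.2.1

lemma pvReach_symm {R C : Int} {grids : List (List String)} {s p : Int × Int}
    (h : pvReach R C grids s p) : pvReach R C grids p s :=
  ⟨pvGood_of_reach h, (Relation.ReflTransGen.symmetric pvStep_symm) h.2⟩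

lemma pvReach_trans {R C : Int} {grids : List (List String)} {s p q : Int × Int}
    (h1 : pvReach R C grids s p) (h2 : pvReach R C grids p q) : pvReach R C grids s q :=
  ⟨h1.1, h1.2.trans h2.2⟩

lemma pvReach_tail {R C : Int} {grids : List (List String)} {s p q : Int × Int}
    (h1 : pvReach R C grids s p) (h2 : pvStep R C grids p q) : pvReach R C grids s q :=
  ⟨h1.1, h1.2.tail h2⟩

-- ---------- row-major indices, components, ranks ----------
-- classical filter, so that reachability (not decidable by a program) can be filtered on
noncomputable def pvFilter {α : Type} (P : α → Prop) (s : Finset α) : Finset α :=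
  @Finset.filter α P (fun _ => Classical.dec _) s

lemma mem_pvFilter {α : Type} {P : α → Prop} {s : Finset α} {x : α} :
    x ∈ pvFilter P s ↔ x ∈ s ∧ P x := by
  unfold pvFilter
  exact @Finset.mem_filter _ P (fun _ => Classical.dec _) s x

def pvIdx0 (C : Int) (p : Int × Int) : Int := p.1 * C + p.2 + 1

noncomputable def pvCells (R C : Int) : Finset (Int × Int) := Finset.Ico 0 R ×ˢ Finset.Ico 0 C

lemma mem_pvCells {R C : Int} {p : Int × Int} :
    p ∈ pvCells R C ↔ 0 ≤ p.1 ∧ p.1 < R ∧ 0 ≤ p.2 ∧ p.2 < C := by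
  simp [pvCells, Finset.mem_product, and_assoc]

lemma pvGood_mem_cells {R C : Int} {grids : List (List String)} {p : Int × Int}
    (h : pvGood R C grids p) : p ∈ pvCells R C :=
  mem_pvCells.2 ⟨h.1, h.2.1, h.2.2.1, h.2.2.2.1⟩

lemma pvIdx0_pos {R C : Int} {p : Int × Int} (h : p ∈ pvCells R C) : 1 ≤ pvIdx0 C p := by
  rw [mem_pvCells] at h
  have : 0 ≤ p.1 * C := mul_nonneg h.1 (le_of_lt (lt_of_le_of_lt h.2.2.1 h.2.2.2))
  unfold pvIdx0; omega

lemma pvIdx0_le {R C : Int} {p : Int × Int} (h : p ∈ pvCells R C) : pvIdx0 C p ≤ R * C := by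
  rw [mem_pvCells] at h
  have h1 : p.1 * C ≤ (R - 1) * C :=
    mul_le_mul_of_nonneg_right (by omega) (by omega)
  have h2 : (R - 1) * C = R * C - C := by ring
  unfold pvIdx0; omega

lemma pvIdx0_inj {R C : Int} {p q : Int × Int} (hp : p ∈ pvCells R C) (hq : q ∈ pvCells R C)
    (h : pvIdx0 C p = pvIdx0 C q) : p = q := by
  rw [mem_pvCells] at hp hq
  unfold pvIdx0 at h
  have h1 : p.1 = q.1 := by
    rcases lt_trichotomy p.1 q.1 with hlt | heq | hgt
    · have := mul_le_mul_of_nonneg_right (show p.1 + 1 ≤ q.1 by omega)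
        (show (0:Int) ≤ C by omega)
      rw [add_mul, one_mul] at this; omega
    · exact heq
    · have := mul_le_mul_of_nonneg_right (show q.1 + 1 ≤ p.1 by omega)
        (show (0:Int) ≤ C by omega)
      rw [add_mul, one_mul] at this; omega
  have h2 : p.2 = q.2 := by rw [h1] at h; omega
  exact Prod.ext h1 h2

noncomputable def pvCompF (R C : Int) (grids : List (List String)) (p : Int × Int) :
    Finset (Int × Int) :=
  pvFilter (fun q => pvReach R C grids p q) (pvCells R C)

lemma mem_pvCompF {R C : Int} {grids : List (List String)} {p q : Int × Int} :
    q ∈ pvCompF R C grids p ↔ pvReach R C grids p q := by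
  unfold pvCompF
  rw [mem_pvFilter]
  exact ⟨fun h => h.2, fun h => ⟨pvGood_mem_cells (pvGood_of_reach h), h⟩⟩

lemma pvCompF_nonempty {R C : Int} {grids : List (List String)} {p : Int × Int}
    (h : pvGood R C grids p) : ((pvCompF R C grids p).image (pvIdx0 C)).Nonempty :=
  ⟨pvIdx0 C p, Finset.mem_image_of_mem _ (mem_pvCompF.2 (pvReach_refl h))⟩

noncomputable def pvCompMin (R C : Int) (grids : List (List String)) (p : Int × Int) : Int :=
  @dite _ (pvGood R C grids p) (Classical.dec _)
    (fun h => ((pvCompF R C grids p).image (pvIdx0 C)).min' (pvCompF_nonempty h))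
    (fun _ => 0)

lemma pvCompMin_eq_min' {R C : Int} {grids : List (List String)} {p : Int × Int}
    (h : pvGood R C grids p) :
    pvCompMin R C grids p = ((pvCompF R C grids p).image (pvIdx0 C)).min' (pvCompF_nonempty h) := by
  unfold pvCompMin
  rw [dif_pos h]

lemma pvCompMin_le {R C : Int} {grids : List (List String)} {p q : Int × Int}
    (h : pvReach R C grids p q) : pvCompMin R C grids p ≤ pvIdx0 C q := by
  rw [pvCompMin_eq_min' h.1]
  exact Finset.min'_le _ _ (Finset.mem_image_of_mem _ (mem_pvCompF.2 h))

lemma pvCompMin_mem {R C : Int} {grids : List (List String)} {p : Int × Int}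
    (h : pvGood R C grids p) :
    ∃ m, pvReach R C grids p m ∧ pvIdx0 C m = pvCompMin R C grids p := by
  have hmem := Finset.min'_mem _ (pvCompF_nonempty h)
  rw [Finset.mem_image] at hmem
  rcases hmem with ⟨m, hm, hval⟩
  exact ⟨m, mem_pvCompF.1 hm, by rw [hval, pvCompMin_eq_min' h]⟩

lemma pvCompMin_congr {R C : Int} {grids : List (List String)} {p q : Int × Int}
    (h : pvReach R C grids p q) : pvCompMin R C grids p = pvCompMin R C grids q := by
  have hsets : pvCompF R C grids p = pvCompF R C grids q := by
    apply Finset.ext; intro x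
    rw [mem_pvCompF, mem_pvCompF]
    exact ⟨fun hx => pvReach_trans (pvReach_symm h) hx, fun hx => pvReach_trans h hx⟩
  rw [pvCompMin_eq_min' h.1, pvCompMin_eq_min' (pvGood_of_reach h)]
  congr 1
  rw [hsets]

lemma pvCompMin_le_self {R C : Int} {grids : List (List String)} {p : Int × Int}
    (h : pvGood R C grids p) : pvCompMin R C grids p ≤ pvIdx0 C p :=
  pvCompMin_le (pvReach_refl h)

lemma pvCompMin_pos {R C : Int} {grids : List (List String)} {p : Int × Int}
    (h : pvGood R C grids p) : 1 ≤ pvCompMin R C grids p := by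
  rcases pvCompMin_mem h with ⟨m, hm, hval⟩
  rw [← hval]
  exact pvIdx0_pos (pvGood_mem_cells (pvGood_of_reach hm))

def pvIsFirst (R C : Int) (grids : List (List String)) (q : Int × Int) : Prop :=
  pvGood R C grids q ∧ pvIdx0 C q = pvCompMin R C grids q

noncomputable def pvFirsts (R C : Int) (grids : List (List String)) : Finset (Int × Int) :=
  pvFilter (pvIsFirst R C grids) (pvCells R C)

lemma mem_pvFirsts {R C : Int} {grids : List (List String)} {q : Int × Int} :
    q ∈ pvFirsts R C grids ↔ pvIsFirst R C grids q := by
  unfold pvFirsts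
  rw [mem_pvFilter]
  exact ⟨fun h => h.2, fun h => ⟨pvGood_mem_cells h.1, h⟩⟩

noncomputable def pvCntLe (R C : Int) (grids : List (List String)) (t : Int) : Finset (Int × Int) :=
  pvFilter (fun f => pvIdx0 C f ≤ t) (pvFirsts R C grids)

lemma mem_pvCntLe {R C : Int} {grids : List (List String)} {t : Int} {f : Int × Int} :
    f ∈ pvCntLe R C grids t ↔ f ∈ pvFirsts R C grids ∧ pvIdx0 C f ≤ t := by
  unfold pvCntLe; exact mem_pvFilter

noncomputable def pvRank (R C : Int) (grids : List (List String)) (p : Int × Int) : Int :=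
  1 + ((pvCntLe R C grids (pvCompMin R C grids p - 1)).card : Int)

lemma pvRank_pos {R C : Int} {grids : List (List String)} {p : Int × Int} :
    1 ≤ pvRank R C grids p := by
  unfold pvRank
  have : (0:Int) ≤ ((pvCntLe R C grids (pvCompMin R C grids p - 1)).card : Int) :=
    Int.natCast_nonneg _
  omega

-- how pvCntLe grows when passing t+1: by the unique first cell with index t+1, if any
lemma pvCntLe_step_some {R C : Int} {grids : List (List String)} {t : Int} {s : Int × Int}
    (hs : pvIsFirst R C grids s) (hidx : pvIdx0 C s = t + 1) :
    pvCntLe R C grids (t + 1) = insert s (pvCntLe R C grids t) ∧ s ∉ pvCntLe R C grids t := by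
  constructor
  · apply Finset.ext; intro f
    rw [Finset.mem_insert, mem_pvCntLe, mem_pvCntLe]
    constructor
    · rintro ⟨hf, hle⟩
      rcases lt_or_eq_of_le hle with hlt | heq
      · exact Or.inr ⟨hf, by omega⟩
      · refine Or.inl (pvIdx0_inj ?_ (pvGood_mem_cells hs.1) (by omega))
        exact pvGood_mem_cells (mem_pvFirsts.1 hf).1
    · rintro (rfl | ⟨hf, hle⟩)
      · exact ⟨mem_pvFirsts.2 hs, by omega⟩
      · exact ⟨hf, by omega⟩
  · rw [mem_pvCntLe]
    rintro ⟨-, hle⟩; omega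

lemma pvCntLe_step_none {R C : Int} {grids : List (List String)} {t : Int}
    (h : ∀ f ∈ pvFirsts R C grids, pvIdx0 C f ≠ t + 1) :
    pvCntLe R C grids (t + 1) = pvCntLe R C grids t := by
  apply Finset.ext; intro f
  rw [mem_pvCntLe, mem_pvCntLe]
  constructor
  · rintro ⟨hf, hle⟩
    exact ⟨hf, by have := h f hf; omega⟩
  · rintro ⟨hf, hle⟩; exact ⟨hf, by omega⟩

-- ---------- 2D grid lemmas ----------
def pvDims (R C : Int) (g : List (List Int)) : Prop :=
  g.length = R.toNat ∧ ∀ row ∈ g, row.length = C.toNat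

lemma pvGet2_nonneg_eq {α : Type} (g : List (List α)) {r c : Int} (h1 : 0 ≤ r) (h3 : 0 ≤ c) :
    pvGet2 g r c = (g[r.toNat]?).bind (fun row => row[c.toNat]?) := by
  unfold pvGet2
  rw [PySem.List.pyGet?_of_nonneg g h1]
  cases g[r.toNat]? with
  | none => rfl
  | some row => simp [PySem.List.pyGet?_of_nonneg row h3]

lemma pvBuild_dims (R C : Int) (f : Int → Int → Int) :
    pvDims R C ((PySem.List.pyRange 0 R 1).map
      (fun r => (PySem.List.pyRange 0 C 1).map (fun c => f r c))) := by
  constructor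
  · simp [PySem.List.length_pyRange_one]
  · intro row hrow
    rw [List.mem_map] at hrow
    rcases hrow with ⟨r, -, rfl⟩
    simp [PySem.List.length_pyRange_one]

lemma pvGet2_build {R C : Int} (f : Int → Int → Int) {r c : Int}
    (h1 : 0 ≤ r) (h2 : r < R) (h3 : 0 ≤ c) (h4 : c < C) :
    pvGet2 ((PySem.List.pyRange 0 R 1).map
      (fun r => (PySem.List.pyRange 0 C 1).map (fun c => f r c))) r c = some (f r c) := by
  rw [pvGet2_nonneg_eq _ h1 h3, List.getElem?_map,
    PySem.List.getElem?_pyRange_one, if_pos (by omega : r.toNat < (R - 0).toNat)]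
  simp only [Option.map_some, Option.bind_some, List.getElem?_map,
    PySem.List.getElem?_pyRange_one]
  rw [if_pos (by omega : c.toNat < (C - 0).toNat)]
  simp only [Option.map_some, Option.some.injEq]
  rw [show (0:Int) + r.toNat = r by omega, show (0:Int) + c.toNat = c by omega]

lemma pvGet2_total {R C : Int} {g : List (List Int)} (h : pvDims R C g) {r c : Int}
    (h1 : 0 ≤ r) (h2 : r < R) (h3 : 0 ≤ c) (h4 : c < C) :
    ∃ v, pvGet2 g r c = some v := by
  have hL := h.1
  rw [pvGet2_nonneg_eq _ h1 h3]
  have hr : r.toNat < g.length := by omega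
  rw [List.getElem?_eq_getElem hr]
  have hc : c.toNat < (g[r.toNat]).length := by
    have hlen := h.2 (g[r.toNat]) (List.getElem_mem hr)
    omega
  refine ⟨(g[r.toNat])[c.toNat], ?_⟩
  simp [List.getElem?_eq_getElem hc]

lemma pvSet2_eq_set {g : List (List Int)} {r c : Int} (h1 : 0 ≤ r) (h3 : 0 ≤ c)
    (hr : r.toNat < g.length) (v : Int) :
    pvSet2 g r c v = g.set r.toNat ((g[r.toNat]).set c.toNat v) := by
  unfold pvSet2
  rw [PySem.List.pyGetD_eq_getElem g ([] : List Int) h1 (by omega),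
    PySem.List.pySetD_of_nonneg _ _ h3, PySem.List.pySetD_of_nonneg _ _ h1]

lemma pvSet2_dims {R C : Int} {g : List (List Int)} (h : pvDims R C g) {r c : Int}
    (h1 : 0 ≤ r) (h2 : r < R) (h3 : 0 ≤ c) (_h4 : c < C) (v : Int) :
    pvDims R C (pvSet2 g r c v) := by
  have hL := h.1
  have hr : r.toNat < g.length := by omega
  rw [pvSet2_eq_set h1 h3 hr]
  constructor
  · simp [h.1]
  · intro row hrow
    rcases List.mem_or_eq_of_mem_set hrow with hmem | rfl
    · exact h.2 _ hmem
    · rw [List.length_set]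
      exact h.2 _ (List.getElem_mem hr)

lemma pvGet2_set2_same {R C : Int} {g : List (List Int)} (h : pvDims R C g) {r c : Int}
    (h1 : 0 ≤ r) (h2 : r < R) (h3 : 0 ≤ c) (_h4 : c < C) (v : Int) :
    pvGet2 (pvSet2 g r c v) r c = some v := by
  have hL := h.1
  have hr : r.toNat < g.length := by omega
  have hc : c.toNat < (g[r.toNat]).length := by
    have hlen := h.2 (g[r.toNat]) (List.getElem_mem hr); omega
  rw [pvSet2_eq_set h1 h3 hr, pvGet2_nonneg_eq _ h1 h3]
  rw [List.getElem?_set_self (by simpa using hr)]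
  simp [List.getElem?_set_self (by simpa using hc)]

lemma pvGet2_set2_ne {g : List (List Int)} {r c r' c' : Int} (h1 : 0 ≤ r) (h3 : 0 ≤ c)
    (h1' : 0 ≤ r') (h3' : 0 ≤ c') (hr : r.toNat < g.length)
    (hne : (r', c') ≠ (r, c)) (v : Int) :
    pvGet2 (pvSet2 g r c v) r' c' = pvGet2 g r' c' := by
  rw [pvSet2_eq_set h1 h3 hr, pvGet2_nonneg_eq _ h1' h3', pvGet2_nonneg_eq _ h1' h3']
  by_cases hrr : r'.toNat = r.toNat
  · have hreq : r' = r := by omega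
    have hcne : c'.toNat ≠ c.toNat := by
      intro hcc
      exact hne (by rw [hreq]; exact congrArg _ (by omega : c' = c))
    rw [hrr, List.getElem?_set_self (by simpa using hr)]
    rw [List.getElem?_eq_getElem hr]
    simp only [Option.bind_some]
    rw [List.getElem?_set_ne (by omega : c.toNat ≠ c'.toNat)]
  · rw [List.getElem?_set_ne (by omega)]

-- ---------- zero counting (BFS termination measure) ----------
def pvZ (g : List (List Int)) : Nat := (g.map (fun row => row.count 0)).sum

lemma pvSumLe (l : List Nat) (n : Nat) (h : ∀ x ∈ l, x ≤ n) : l.sum ≤ l.length * n := by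
  induction l with
  | nil => simp
  | cons x xs ih =>
    simp only [List.sum_cons, List.length_cons]
    have := ih (fun y hy => h y (List.mem_cons_of_mem _ hy))
    have := h x List.mem_cons_self
    calc x + xs.sum ≤ n + xs.length * n := by omega
    _ = (xs.length + 1) * n := by ring

lemma pvZ_le {R C : Int} {g : List (List Int)} (h : pvDims R C g) :
    pvZ g ≤ R.toNat * C.toNat := by
  unfold pvZ
  have hb : ∀ x ∈ g.map (fun row => row.count 0), x ≤ C.toNat := by
    intro x hx
    rw [List.mem_map] at hx
    rcases hx with ⟨row, hrow, rfl⟩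
    calc row.count 0 ≤ row.length := List.count_le_length
    _ = C.toNat := h.2 _ hrow
  calc (g.map (fun row => row.count 0)).sum ≤ (g.map _).length * C.toNat := pvSumLe _ _ hb
  _ = R.toNat * C.toNat := by rw [List.length_map, h.1]

lemma pvSumSet (l : List Nat) (n : Nat) (a : Nat) (h : n < l.length) :
    (l.set n a).sum + l[n] = l.sum + a := by
  induction l generalizing n with
  | nil => simp at h
  | cons x xs ih =>
    cases n with
    | zero => simp [List.set]; omega
    | succ m =>
      simp only [List.set, List.sum_cons, List.getElem_cons_succ]
      have := ih m (by simpa using h)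
      omega

lemma pvZ_set {R C : Int} {g : List (List Int)} (h : pvDims R C g) {r c : Int}
    (h1 : 0 ≤ r) (h2 : r < R) (h3 : 0 ≤ c) (h4 : c < C)
    (hzero : pvGet2 g r c = some 0) {v : Int} (hv : v ≠ 0) :
    pvZ (pvSet2 g r c v) + 1 = pvZ g := by
  have hL := h.1
  have hr : r.toNat < g.length := by omega
  have hc : c.toNat < (g[r.toNat]).length := by
    have hlen := h.2 (g[r.toNat]) (List.getElem_mem hr); omega
  have hval : (g[r.toNat])[c.toNat] = 0 := by
    rw [pvGet2_nonneg_eq _ h1 h3, List.getElem?_eq_getElem hr] at hzero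
    simp only [Option.bind_some] at hzero
    rw [List.getElem?_eq_getElem hc] at hzero
    exact Option.some_inj.1 hzero
  have hcount : ((g[r.toNat]).set c.toNat v).count 0 + 1 = (g[r.toNat]).count 0 := by
    rw [List.count_set hc]
    have heq : ((g[r.toNat])[c.toNat] == (0:Int)) = true := by simp [hval]
    have hv' : ((v == (0:Int))) = false := by simp [hv]
    rw [heq, hv']
    norm_num
    have hpos : 1 ≤ (g[r.toNat]).count 0 :=
      List.one_le_count_iff.2 (hval ▸ List.getElem_mem hc)
    omega
  unfold pvZ
  rw [pvSet2_eq_set h1 h3 hr, List.map_set]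
  have hsum := pvSumSet (g.map (fun row => row.count 0)) r.toNat
    (((g[r.toNat]).set c.toNat v).count 0) (by simpa using hr)
  rw [List.getElem_map] at hsum
  omega

-- ---------- A's BFS flood fill marks exactly the connected component ----------
lemma pvBfsFold_spec (R C : Int) (grids : List (List String)) (idx : Int) (s p : Int × Int)
    (L0 : List (List Int)) (hidx : idx ≠ 0)
    (hL0 : ∀ x, pvReach R C grids s x → pvGet2 L0 x.1 x.2 = some 0)
    (hps : pvReach R C grids s p) :
    ∀ (ds : List (Int × Int)), (∀ d ∈ ds, d ∈ pvDirs) →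
    ∀ (label : List (List Int)) (qacc : List (Int × Int)) (M : Finset (Int × Int)),
      pvDims R C label →
      (∀ x ∈ M, pvReach R C grids s x) →
      (∀ x ∈ qacc, x ∈ M) →
      (∀ x ∈ M, pvGet2 label x.1 x.2 = some idx) →
      (∀ r c, 0 ≤ r → 0 ≤ c → ((r, c) : Int × Int) ∉ M → pvGet2 label r c = pvGet2 L0 r c) →
      ∃ M', M ⊆ M' ∧
        pvDims R C (ds.foldl (pvBfsStep R C grids idx p) (label, qacc)).1 ∧
        (∀ x ∈ M', pvReach R C grids s x) ∧
        (∀ x ∈ (ds.foldl (pvBfsStep R C grids idx p) (label, qacc)).2, x ∈ M') ∧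
        (∀ x ∈ M', pvGet2 (ds.foldl (pvBfsStep R C grids idx p) (label, qacc)).1 x.1 x.2 = some idx) ∧
        (∀ r c, 0 ≤ r → 0 ≤ c → ((r, c) : Int × Int) ∉ M' →
          pvGet2 (ds.foldl (pvBfsStep R C grids idx p) (label, qacc)).1 r c = pvGet2 L0 r c) ∧
        (∀ x ∈ M', x ∉ M → x ∈ (ds.foldl (pvBfsStep R C grids idx p) (label, qacc)).2) ∧
        (∃ extra, (ds.foldl (pvBfsStep R C grids idx p) (label, qacc)).2 = qacc ++ extra) ∧
        (∀ d ∈ ds, pvGood R C grids (p.1 + d.1, p.2 + d.2) → (p.1 + d.1, p.2 + d.2) ∈ M') ∧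
        5 * pvZ (ds.foldl (pvBfsStep R C grids idx p) (label, qacc)).1 +
          (ds.foldl (pvBfsStep R C grids idx p) (label, qacc)).2.length ≤
          5 * pvZ label + qacc.length := by
  intro ds
  induction ds with
  | nil =>
    intro _ label qacc M hdims hM hq hlabM hlabN
    refine ⟨M, Finset.Subset.refl M, hdims, hM, hq, hlabM, hlabN, ?_, ⟨[], by simp⟩, ?_, le_refl _⟩
    · intro x hx hnx; exact absurd hx hnx
    · intro d hd; exact absurd hd (List.not_mem_nil)
  | cons d ds ih =>
    intro hds label qacc M hdims hM hq hlabM hlabN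
    have hd : d ∈ pvDirs := hds d List.mem_cons_self
    have hds' : ∀ d' ∈ ds, d' ∈ pvDirs := fun d' hd' => hds d' (List.mem_cons_of_mem _ hd')
    rw [List.foldl_cons]
    set x : Int × Int := (p.1 + d.1, p.2 + d.2) with hxdef
    have hadj : pvAdj p x := pvAdj_of_dir hd
    by_cases hcond : 0 ≤ p.1 + d.1 ∧ p.1 + d.1 < R ∧ 0 ≤ p.2 + d.2 ∧ p.2 + d.2 < C ∧
        pvGet2 grids (p.1 + d.1) (p.2 + d.2) = some "X" ∧ pvGet2 label (p.1 + d.1) (p.2 + d.2) = some 0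
    · -- the neighbour is marked and enqueued
      have hstep : pvBfsStep R C grids idx p (label, qacc) d =
          (pvSet2 label x.1 x.2 idx, qacc ++ [x]) := by
        unfold pvBfsStep
        rw [if_pos hcond]
      have hgoodx : pvGood R C grids x :=
        ⟨hcond.1, hcond.2.1, hcond.2.2.1, hcond.2.2.2.1, hcond.2.2.2.2.1⟩
      have hreachx : pvReach R C grids s x :=
        pvReach_tail hps ⟨pvGood_of_reach hps, hgoodx, hadj⟩
      have hxM : x ∉ M := by
        intro hmem
        have := hlabM x hmem
        rw [hcond.2.2.2.2.2] at this
        exact hidx (by injection this with h; omega)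
      have hdims1 : pvDims R C (pvSet2 label x.1 x.2 idx) :=
        pvSet2_dims hdims hcond.1 hcond.2.1 hcond.2.2.1 hcond.2.2.2.1 idx
      have hlabM1 : ∀ y ∈ insert x M, pvGet2 (pvSet2 label x.1 x.2 idx) y.1 y.2 = some idx := by
        intro y hy
        rcases Finset.mem_insert.1 hy with rfl | hyM
        · exact pvGet2_set2_same hdims hcond.1 hcond.2.1 hcond.2.2.1 hcond.2.2.2.1 idx
        · have hgy := pvGood_of_reach (hM y hyM)
          have hyne : ((y.1, y.2) : Int × Int) ≠ (x.1, x.2) := by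
            intro he
            rw [Prod.mk.injEq] at he
            have hyx : y = x := Prod.ext_iff.2 ⟨he.1, he.2⟩
            exact hxM (hyx ▸ hyM)
          rw [pvGet2_set2_ne hcond.1 hcond.2.2.1 hgy.1 hgy.2.2.1
            (by have := hdims.1; omega) hyne idx]
          exact hlabM y hyM
      have hlabN1 : ∀ r c, 0 ≤ r → 0 ≤ c → ((r, c) : Int × Int) ∉ insert x M →
          pvGet2 (pvSet2 label x.1 x.2 idx) r c = pvGet2 L0 r c := by
        intro r c hr hc hnm
        rw [Finset.mem_insert] at hnm
        have hne1 : ((r, c) : Int × Int) ≠ x := fun h => hnm (Or.inl h)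
        have hne2 : ((r, c) : Int × Int) ∉ M := fun h => hnm (Or.inr h)
        rw [pvGet2_set2_ne hcond.1 hcond.2.2.1 hr hc (by have := hdims.1; omega)
          (by simpa [Prod.ext_iff] using hne1) idx]
        exact hlabN r c hr hc hne2
      have hZ : pvZ (pvSet2 label x.1 x.2 idx) + 1 = pvZ label :=
        pvZ_set hdims hcond.1 hcond.2.1 hcond.2.2.1 hcond.2.2.2.1 hcond.2.2.2.2.2 hidx
      obtain ⟨M', hsub, hdims', hM', hq', hlabM', hlabN', hnew', ⟨extra, hext⟩, hdall, hmeas⟩ :=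
        ih hds' (pvSet2 label x.1 x.2 idx) (qacc ++ [x]) (insert x M) hdims1
          (by intro y hy
              rcases Finset.mem_insert.1 hy with rfl | hyM
              · exact hreachx
              · exact hM y hyM)
          (by intro y hy
              rcases List.mem_append.1 hy with hy | hy
              · exact Finset.mem_insert_of_mem (hq y hy)
              · rw [List.mem_singleton] at hy
                exact hy ▸ Finset.mem_insert_self x M)
          hlabM1 hlabN1
      rw [hstep]
      refine ⟨M', Finset.Subset.trans (Finset.subset_insert x M) hsub, hdims', hM', hq',
        hlabM', hlabN', ?_, ⟨[x] ++ extra, by rw [hext]; simp⟩, ?_, ?_⟩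
      · intro y hy hnyM
        by_cases hyx : y = x
        · subst hyx
          rw [hext]
          exact List.mem_append_left _ (List.mem_append_right _ (by simp))
        · exact hnew' y hy (fun hmem => (Finset.mem_insert.1 hmem).elim hyx hnyM)
      · intro d' hd' hgood'
        rcases List.mem_cons.1 hd' with rfl | hd'
        · exact hsub (Finset.mem_insert_self x M)
        · exact hdall d' hd' hgood'
      · have hlen : (qacc ++ [x]).length = qacc.length + 1 := by simp
        rw [hlen] at hmeas
        omega
    · -- nothing happens for this direction
      have hstep : pvBfsStep R C grids idx p (label, qacc) d = (label, qacc) := by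
        unfold pvBfsStep
        rw [if_neg hcond]
      obtain ⟨M', hsub, hdims', hM', hq', hlabM', hlabN', hnew', hext, hdall, hmeas⟩ :=
        ih hds' label qacc M hdims hM hq hlabM hlabN
      rw [hstep]
      refine ⟨M', hsub, hdims', hM', hq', hlabM', hlabN', hnew', hext, ?_, hmeas⟩
      intro d' hd' hgood'
      rcases List.mem_cons.1 hd' with rfl | hd'
      · -- the condition can only fail because the cell is already marked
        have hxM : x ∈ M := by
          by_contra hxnM
          have hx0 : pvGet2 label x.1 x.2 = some 0 := by
            rw [hlabN x.1 x.2 hgood'.1 hgood'.2.2.1 (by simpa using hxnM)]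
            exact hL0 x (pvReach_tail hps ⟨pvGood_of_reach hps, hgood', hadj⟩)
          exact hcond ⟨hgood'.1, hgood'.2.1, hgood'.2.2.1, hgood'.2.2.2.1, hgood'.2.2.2.2, hx0⟩
        exact hsub hxM
      · exact hdall d' hd' hgood'

lemma pvBfs_spec (R C : Int) (grids : List (List String)) (idx : Int) (s : Int × Int)
    (L0 : List (List Int)) (hidx : idx ≠ 0)
    (hL0 : ∀ x, pvReach R C grids s x → pvGet2 L0 x.1 x.2 = some 0) :
    ∀ (fuel : Nat) (label : List (List Int)) (q : List (Int × Int)) (M : Finset (Int × Int)),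
      pvDims R C label →
      (∀ x ∈ M, pvReach R C grids s x) →
      s ∈ M →
      (∀ x ∈ q, x ∈ M) →
      (∀ x ∈ M, x ∉ q → ∀ d ∈ pvDirs, pvGood R C grids (x.1 + d.1, x.2 + d.2) →
        (x.1 + d.1, x.2 + d.2) ∈ M) →
      (∀ x ∈ M, pvGet2 label x.1 x.2 = some idx) →
      (∀ r c, 0 ≤ r → 0 ≤ c → ((r, c) : Int × Int) ∉ M → pvGet2 label r c = pvGet2 L0 r c) →
      5 * pvZ label + q.length < fuel →
      pvDims R C (pvBfs R C grids idx fuel label q) ∧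
      (∀ x, pvReach R C grids s x → pvGet2 (pvBfs R C grids idx fuel label q) x.1 x.2 = some idx) ∧
      (∀ r c, 0 ≤ r → 0 ≤ c → ¬ pvReach R C grids s (r, c) →
        pvGet2 (pvBfs R C grids idx fuel label q) r c = pvGet2 L0 r c) := by
  intro fuel
  induction fuel with
  | zero => intro label q M _ _ _ _ _ _ _ hfuel; omega
  | succ fuel ih =>
    intro label q M hdims hM hsM hq hclosed hlabM hlabN hfuel
    match q with
    | [] =>
      have hMfull : ∀ x, x ∈ M ↔ pvReach R C grids s x := by
        intro x
        constructor
        · exact hM x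
        · rintro ⟨hgs, rtg⟩
          induction rtg with
          | refl => exact hsM
          | tail hbc hstep ih2 =>
            rcases pvAdj_iff_dir.1 hstep.2.2 with ⟨d, hd, rfl⟩
            exact hclosed _ ih2 (List.not_mem_nil) d hd hstep.2.1
      show pvDims R C label ∧ _
      refine ⟨hdims, ?_, ?_⟩
      · intro x hx; exact hlabM x ((hMfull x).2 hx)
      · intro r c hr hc hnx
        exact hlabN r c hr hc (fun hm => hnx ((hMfull _).1 hm))
    | p :: q' =>
      have hps : pvReach R C grids s p := hM p (hq p List.mem_cons_self)
      obtain ⟨M', hsub, hdims', hM', hq', hlabM', hlabN', hnew', ⟨extra, hext⟩, hdall, hmeas⟩ :=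
        pvBfsFold_spec R C grids idx s p L0 hidx hL0 hps pvDirs (fun _ h => h) label q' M hdims hM
          (fun y hy => hq y (List.mem_cons_of_mem _ hy)) hlabM hlabN
      show pvDims R C (pvBfs R C grids idx fuel _ _) ∧ _
      refine ih _ _ M' hdims' hM' (hsub hsM) hq' ?_ hlabM' hlabN' ?_
      · intro y hy hnyq d hd hgood
        by_cases hyp : y = p
        · subst hyp; exact hdall d hd hgood
        · have hyM : y ∈ M := by
            by_contra hyMn
            exact hnyq (hnew' y hy hyMn)
          have hynq' : y ∉ q' := by
            intro hmem
            exact hnyq (by rw [hext]; exact List.mem_append_left _ hmem)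
          exact hsub (hclosed y hyM (by simp [hyp, hynq']) d hd hgood)
      · have hql : q'.length + 1 = (p :: q').length := by simp
        omega
-- ---------- the canonical labelling both programs compute ----------
noncomputable def pvCanonVal (R C : Int) (grids : List (List String)) (r c : Int) : Int :=
  if 0 ≤ r ∧ r < R ∧ 0 ≤ c ∧ c < C ∧ pvGet2 grids r c = some "X" then
    pvRank R C grids (r, c)
  else 0

lemma pvCanonVal_good {R C : Int} {grids : List (List String)} {r c : Int}
    (h : pvGood R C grids (r, c)) : pvCanonVal R C grids r c = pvRank R C grids (r, c) :=
  if_pos h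

lemma pvCanonVal_bad {R C : Int} {grids : List (List String)} {r c : Int}
    (h : ¬ pvGood R C grids (r, c)) : pvCanonVal R C grids r c = 0 :=
  if_neg h

noncomputable def pvCanonGrid (R C : Int) (grids : List (List String)) : List (List Int) :=
  (PySem.List.pyRange 0 R 1).map
    (fun r => (PySem.List.pyRange 0 C 1).map (fun c => pvCanonVal R C grids r c))

lemma pvGet2_natCast {g : List (List Int)} {i j : Nat} (hi : i < g.length)
    (hj : j < (g[i]).length) : pvGet2 g (i : Int) (j : Int) = some ((g[i])[j]) := by
  rw [pvGet2_nonneg_eq g (Int.natCast_nonneg i) (Int.natCast_nonneg j)]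
  simp only [Int.toNat_natCast]
  rw [List.getElem?_eq_getElem hi]
  simp [List.getElem?_eq_getElem hj]

lemma pvGrid_ext {R C : Int} {g g' : List (List Int)} (h : pvDims R C g) (h' : pvDims R C g')
    (he : ∀ r c : Int, 0 ≤ r → r < R → 0 ≤ c → c < C → pvGet2 g r c = pvGet2 g' r c) :
    g = g' := by
  have hlen : g.length = g'.length := by rw [h.1, h'.1]
  apply List.ext_getElem hlen
  intro i hi hi'
  have hrow : (g[i]).length = C.toNat := h.2 (g[i]) (List.getElem_mem hi)
  have hrow' : (g'[i]).length = C.toNat := h'.2 (g'[i]) (List.getElem_mem hi')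
  apply List.ext_getElem (by rw [hrow, hrow'])
  intro j hj hj'
  have hiR : (i : Int) < R := by have := h.1; omega
  have hjC : (j : Int) < C := by omega
  have := he i j (Int.natCast_nonneg i) hiR (Int.natCast_nonneg j) hjC
  rw [pvGet2_natCast hi hj, pvGet2_natCast hi' hj'] at this
  exact Option.some_inj.1 this

-- a component whose minimum row-major index is attained at a given in-range cell
lemma pvMinCellEq {R C : Int} {grids : List (List String)} {q : Int × Int} {r c : Int}
    (hq : pvGood R C grids q) (hin : ((r, c) : Int × Int) ∈ pvCells R C)
    (hmin : pvCompMin R C grids q = pvIdx0 C (r, c)) :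
    pvReach R C grids q (r, c) ∧ pvIsFirst R C grids (r, c) := by
  obtain ⟨m, hm, hval⟩ := pvCompMin_mem hq
  have hmeq : m = (r, c) :=
    pvIdx0_inj (pvGood_mem_cells (pvGood_of_reach hm)) hin (by omega)
  subst hmeq
  refine ⟨hm, pvGood_of_reach hm, ?_⟩
  rw [← pvCompMin_congr hm]
  exact hmin.symm

-- ---------- A's outer row-major scan ----------
def pvInvA (R C : Int) (grids : List (List String)) (t : Int)
    (st : List (List Int) × Int) : Prop :=
  pvDims R C st.1 ∧
  (∀ p : Int × Int, pvGood R C grids p → pvCompMin R C grids p ≤ t →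
    pvGet2 st.1 p.1 p.2 = some (pvRank R C grids p)) ∧
  (∀ r c : Int, 0 ≤ r → r < R → 0 ≤ c → c < C →
    ¬ (pvGood R C grids (r, c) ∧ pvCompMin R C grids (r, c) ≤ t) →
    pvGet2 st.1 r c = some 0) ∧
  st.2 = 1 + ((pvCntLe R C grids t).card : Int)

lemma pvIdx0_rc {C r c : Int} : pvIdx0 C (r, c) = r * C + c + 1 := rfl

lemma pvInvA_step {R C : Int} {grids : List (List String)} {r c : Int}
    (hr0 : 0 ≤ r) (hrR : r < R) (hc0 : 0 ≤ c) (hcC : c < C)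
    {st : List (List Int) × Int} (hinv : pvInvA R C grids (r * C + c) st) :
    pvInvA R C grids (r * C + c + 1) (pvScanStep R C grids r st c) := by
  obtain ⟨hdims, hlab1, hlab0, hidx⟩ := hinv
  have hin : ((r, c) : Int × Int) ∈ pvCells R C := mem_pvCells.2 ⟨hr0, hrR, hc0, hcC⟩
  by_cases hcond : pvGet2 grids r c = some "X" ∧ pvGet2 st.1 r c = some 0
  · -- a fresh component is flooded
    have hgood : pvGood R C grids (r, c) := ⟨hr0, hrR, hc0, hcC, hcond.1⟩
    have hgt : ¬ pvCompMin R C grids (r, c) ≤ r * C + c := by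
      intro hle
      have hv := hlab1 _ hgood hle
      rw [hcond.2] at hv
      have := pvRank_pos (R := R) (C := C) (grids := grids) (p := ((r, c) : Int × Int))
      have hz := Option.some_inj.1 hv
      omega
    have hminle := pvCompMin_le_self hgood
    rw [pvIdx0_rc] at hminle
    have hmineq : pvCompMin R C grids (r, c) = r * C + c + 1 := by omega
    have hfirst : pvIsFirst R C grids (r, c) := ⟨hgood, by rw [pvIdx0_rc]; omega⟩
    have hidxne : st.2 ≠ 0 := by
      have : (0:Int) ≤ ((pvCntLe R C grids (r * C + c)).card : Int) := Int.natCast_nonneg _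
      omega
    have hL0 : ∀ x, pvReach R C grids (r, c) x → pvGet2 st.1 x.1 x.2 = some 0 := by
      intro x hx
      have hgx := pvGood_of_reach hx
      apply hlab0 x.1 x.2 hgx.1 hgx.2.1 hgx.2.2.1 hgx.2.2.2.1
      rintro ⟨-, hle⟩
      rw [← pvCompMin_congr hx] at hle
      omega
    have hdims1 : pvDims R C (pvSet2 st.1 r c st.2) := pvSet2_dims hdims hr0 hrR hc0 hcC st.2
    obtain ⟨hdimsF, hreachF, hrestF⟩ :=
      pvBfs_spec R C grids st.2 (r, c) st.1 hidxne hL0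
        (5 * (R.toNat * C.toNat) + 2) (pvSet2 st.1 r c st.2) [(r, c)] {(r, c)}
        hdims1
        (by intro x hx
            rw [Finset.mem_singleton] at hx
            subst hx
            exact pvReach_refl hgood)
        (Finset.mem_singleton_self _)
        (by intro x hx
            rw [List.mem_singleton] at hx
            subst hx
            exact Finset.mem_singleton_self _)
        (by intro x hx hnx d hd hg
            rw [Finset.mem_singleton] at hx
            exact absurd (by simp [hx]) hnx)
        (by intro x hx
            rw [Finset.mem_singleton] at hx
            subst hx
            exact pvGet2_set2_same hdims hr0 hrR hc0 hcC st.2)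
        (by intro r' c' hr' hc' hnm
            rw [Finset.mem_singleton] at hnm
            exact pvGet2_set2_ne hr0 hc0 hr' hc' (by have := hdims.1; omega)
              (by simpa [Prod.ext_iff] using hnm) st.2)
        (by have hZ := pvZ_le hdims1
            simp only [List.length_singleton]
            omega)
    have hsteppos : pvScanStep R C grids r st c =
        (pvBfs R C grids st.2 (5 * (R.toNat * C.toNat) + 2) (pvSet2 st.1 r c st.2) [(r, c)],
         st.2 + 1) := by
      unfold pvScanStep
      rw [if_pos hcond]
    rw [hsteppos]
    obtain ⟨hgrow, hnotin⟩ := pvCntLe_step_some hfirst (by rw [pvIdx0_rc])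
    refine ⟨hdimsF, ?_, ?_, ?_⟩
    · intro p hp hple
      by_cases hle : pvCompMin R C grids p ≤ r * C + c
      · have hnr : ¬ pvReach R C grids (r, c) p := by
          intro hre
          rw [pvCompMin_congr hre] at hmineq
          omega
        show pvGet2 _ p.1 p.2 = _
        rw [hrestF p.1 p.2 hp.1 hp.2.2.1 hnr]
        exact hlab1 p hp hle
      · have hlt : r * C + c < pvCompMin R C grids p := by omega
        have hpeq : pvCompMin R C grids p = pvIdx0 C (r, c) := by rw [pvIdx0_rc]; omega
        obtain ⟨hreachp, -⟩ := pvMinCellEq hp hin hpeq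
        have hrp := pvReach_symm hreachp
        show pvGet2 _ p.1 p.2 = _
        rw [hreachF p hrp]
        congr 1
        have hrank : pvRank R C grids p = 1 + ((pvCntLe R C grids (r * C + c)).card : Int) := by
          unfold pvRank
          rw [show pvCompMin R C grids p - 1 = r * C + c by omega]
        omega
    · intro r' c' hr' hrR' hc' hcC' hnot
      have hnr : ¬ pvReach R C grids (r, c) (r', c') := by
        intro hre
        apply hnot
        refine ⟨pvGood_of_reach hre, ?_⟩
        rw [← pvCompMin_congr hre, hmineq]
      rw [hrestF r' c' hr' hc' hnr]
      apply hlab0 r' c' hr' hrR' hc' hcC'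
      rintro ⟨hg, hle⟩
      exact hnot ⟨hg, by omega⟩
    · show st.2 + 1 = _
      rw [hgrow, Finset.card_insert_of_notMem hnotin]
      push_cast
      omega
  · -- already-labelled or water cell: nothing changes, and no component starts here
    have hstepneg : pvScanStep R C grids r st c = st := by
      unfold pvScanStep
      rw [if_neg hcond]
    rw [hstepneg]
    have hnonew : ∀ q : Int × Int, pvGood R C grids q →
        pvCompMin R C grids q ≠ r * C + c + 1 := by
      intro q hq heq
      obtain ⟨hreach, hfirst⟩ := pvMinCellEq hq hin (by rw [pvIdx0_rc]; omega)
      have hgoodrc : pvGood R C grids (r, c) := hfirst.1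
      have hgtt : pvCompMin R C grids (r, c) = r * C + c + 1 := by
        rw [← hfirst.2, pvIdx0_rc]
      have hzero : pvGet2 st.1 r c = some 0 := by
        apply hlab0 r c hr0 hrR hc0 hcC
        rintro ⟨-, hle⟩
        omega
      exact hcond ⟨hgoodrc.2.2.2.2, hzero⟩
    refine ⟨hdims, ?_, ?_, ?_⟩
    · intro p hp hple
      apply hlab1 p hp
      have := hnonew p hp
      omega
    · intro r' c' hr' hrR' hc' hcC' hnot
      apply hlab0 r' c' hr' hrR' hc' hcC'
      rintro ⟨hg, hle⟩
      exact hnot ⟨hg, by omega⟩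
    · rw [pvCntLe_step_none (by
        intro f hf heq
        exact hnonew f (mem_pvFirsts.1 hf).1 (by rw [← (mem_pvFirsts.1 hf).2, heq]))]
      exact hidx

lemma pvInvA_row {R C : Int} {grids : List (List String)} {r : Int}
    (hr0 : 0 ≤ r) (hrR : r < R) :
    ∀ (n : Nat) (c0 : Int) (st : List (List Int) × Int), c0 + n = C → 0 ≤ c0 →
      pvInvA R C grids (r * C + c0) st →
      pvInvA R C grids (r * C + C)
        ((PySem.List.pyRange c0 C 1).foldl (pvScanStep R C grids r) st) := by
  intro n
  induction n with
  | zero =>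
    intro c0 st hc0C hc00 hinv
    rw [PySem.List.pyRange_one_eq_nil (by omega : C ≤ c0), List.foldl_nil]
    rwa [show r * C + c0 = r * C + C by omega] at hinv
  | succ n ih =>
    intro c0 st hc0C hc00 hinv
    have hlt : c0 < C := by omega
    rw [PySem.List.pyRange_one_cons hlt, List.foldl_cons]
    have hstep := pvInvA_step hr0 hrR hc00 hlt hinv
    have := ih (c0 + 1) (pvScanStep R C grids r st c0) (by omega) (by omega)
      (by rw [show r * C + (c0 + 1) = r * C + c0 + 1 by ring]; exact hstep)
    exact this

lemma pvInvA_col {R C : Int} {grids : List (List String)} (hC : 0 < C) :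
    ∀ (n : Nat) (r0 : Int) (st : List (List Int) × Int), r0 + n = R → 0 ≤ r0 →
      pvInvA R C grids (r0 * C) st →
      pvInvA R C grids (R * C)
        ((PySem.List.pyRange r0 R 1).foldl
          (fun st r => (PySem.List.pyRange 0 C 1).foldl (pvScanStep R C grids r) st) st) := by
  intro n
  induction n with
  | zero =>
    intro r0 st hr0R hr00 hinv
    rw [PySem.List.pyRange_one_eq_nil (by omega : R ≤ r0), List.foldl_nil]
    rwa [show r0 * C = R * C by rw [show r0 = R by omega]] at hinv
  | succ n ih =>
    intro r0 st hr0R hr00 hinv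
    have hlt : r0 < R := by omega
    rw [PySem.List.pyRange_one_cons hlt, List.foldl_cons]
    have hrow := pvInvA_row (R := R) (C := C) (grids := grids) hr00 hlt C.toNat 0 st
      (by omega) (le_refl 0) (by rwa [add_zero])
    apply ih (r0 + 1) _ (by omega) (by omega)
    rwa [show (r0 + 1) * C = r0 * C + C by ring]

lemma pvCntLe_all {R C : Int} {grids : List (List String)} :
    pvCntLe R C grids (R * C) = pvFirsts R C grids := by
  apply Finset.ext
  intro f
  rw [mem_pvCntLe]
  refine ⟨fun h => h.1, fun h => ⟨h, ?_⟩⟩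
  exact pvIdx0_le (pvGood_mem_cells (mem_pvFirsts.1 h).1)

lemma pvFirsts_empty_of_degenerate {R C : Int} {grids : List (List String)}
    (h : R ≤ 0 ∨ C ≤ 0) : pvFirsts R C grids = ∅ := by
  apply Finset.eq_empty_of_forall_notMem
  intro f hf
  have hg := (mem_pvFirsts.1 hf).1
  rcases h with h | h
  · have := hg.1
    have := hg.2.1
    omega
  · have := hg.2.2.1
    have := hg.2.2.2.1
    omega

theorem pvA_eq (R C : Int) (grids : List (List String)) :
    label_islands R C grids = (pvCanonGrid R C grids, ((pvFirsts R C grids).card : Int)) := by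
  by_cases hR : R ≤ 0
  · rw [pvFirsts_empty_of_degenerate (Or.inl hR)]
    simp [label_islands, pvCanonGrid, PySem.List.pyRange_one_eq_nil (by omega : R ≤ 0)]
  by_cases hC : C ≤ 0
  · rw [pvFirsts_empty_of_degenerate (Or.inr hC)]
    simp only [label_islands, pvCanonGrid, PySem.List.pyRange_one_eq_nil (by omega : C ≤ 0),
      List.map_nil, List.foldl_nil, PySem.List.foldl_ignore, Finset.card_empty,
      Int.natCast_zero]
    norm_num
  · have hC : 0 < C := by omega
    have hinit : pvInvA R C grids 0
        ((PySem.List.pyRange 0 R 1).map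
          (fun _ => (PySem.List.pyRange 0 C 1).map (fun _ => (0 : Int))), 1) := by
      refine ⟨pvBuild_dims R C (fun _ _ => 0), ?_, ?_, ?_⟩
      · intro p hp hle
        have := pvCompMin_pos hp
        omega
      · intro r c hr hrR hc hcC hnot
        exact pvGet2_build (fun _ _ => 0) hr hrR hc hcC
      · have : pvCntLe R C grids 0 = ∅ := by
          apply Finset.eq_empty_of_forall_notMem
          intro f hf
          rw [mem_pvCntLe] at hf
          have := pvIdx0_pos (pvGood_mem_cells (mem_pvFirsts.1 hf.1).1)
          omega
        rw [this]
        simp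
    have hfin := pvInvA_col (R := R) (C := C) (grids := grids) hC R.toNat 0 _
      (by omega) (le_refl 0) (by rw [zero_mul]; exact hinit)
    obtain ⟨hdims, hlab1, hlab0, hidx⟩ := hfin
    have hval : label_islands R C grids =
        (((PySem.List.pyRange 0 R 1).foldl
            (fun st r => (PySem.List.pyRange 0 C 1).foldl (pvScanStep R C grids r) st)
            ((PySem.List.pyRange 0 R 1).map
              (fun _ => (PySem.List.pyRange 0 C 1).map (fun _ => (0 : Int))), 1)).1,
         ((PySem.List.pyRange 0 R 1).foldl
            (fun st r => (PySem.List.pyRange 0 C 1).foldl (pvScanStep R C grids r) st)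
            ((PySem.List.pyRange 0 R 1).map
              (fun _ => (PySem.List.pyRange 0 C 1).map (fun _ => (0 : Int))), 1)).2 - 1) := rfl
    rw [hval, Prod.ext_iff]
    constructor
    · apply pvGrid_ext hdims (pvBuild_dims R C (pvCanonVal R C grids))
      intro r c hr hrR hc hcC
      rw [pvGet2_build (pvCanonVal R C grids) hr hrR hc hcC]
      by_cases hg : pvGood R C grids (r, c)
      · rw [pvCanonVal_good hg]
        apply hlab1 (r, c) hg
        calc pvCompMin R C grids (r, c) ≤ pvIdx0 C (r, c) := pvCompMin_le_self hg
        _ ≤ R * C := pvIdx0_le (pvGood_mem_cells hg)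
      · rw [pvCanonVal_bad hg]
        exact hlab0 r c hr hrR hc hcC (fun h => hg h.1)
    · rw [hidx, pvCntLe_all]
      omega
-- ---------- B's minimum-propagation sweeps ----------
def pvInvB (R C : Int) (grids : List (List String)) (cur : List (List Int)) : Prop :=
  pvDims R C cur ∧
  (∀ p : Int × Int, pvGood R C grids p →
    ∃ m, pvReach R C grids p m ∧ pvGet2 cur p.1 p.2 = some (pvIdx0 C m)) ∧
  (∀ (p : Int × Int) (v : Int), pvGood R C grids p → pvGet2 cur p.1 p.2 = some v →
    v ≤ pvIdx0 C p) ∧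
  (∀ r c : Int, 0 ≤ r → r < R → 0 ≤ c → c < C → ¬ pvGood R C grids (r, c) →
    pvGet2 cur r c = some 0)

lemma pvInvB_pos {R C : Int} {grids : List (List String)} {cur : List (List Int)}
    (h : pvInvB R C grids cur) {p : Int × Int} {v : Int} (hp : pvGood R C grids p)
    (hv : pvGet2 cur p.1 p.2 = some v) : 1 ≤ v := by
  obtain ⟨m, hm, hval⟩ := h.2.1 p hp
  rw [hv] at hval
  have := pvIdx0_pos (pvGood_mem_cells (pvGood_of_reach hm))
  have := Option.some_inj.1 hval
  omega

lemma pvMinFold_le (R C : Int) (cur : List (List Int)) :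
    ∀ (L : List (Int × Int)) (v0 : Int), L.foldl (pvMinStep R C cur) v0 ≤ v0 := by
  intro L
  induction L with
  | nil => intro v0; exact le_refl v0
  | cons q L ih =>
    intro v0
    rw [List.foldl_cons]
    calc L.foldl (pvMinStep R C cur) (pvMinStep R C cur v0 q) ≤ pvMinStep R C cur v0 q := ih _
    _ ≤ v0 := by
        unfold pvMinStep
        split_ifs with h
        · exact min_le_left _ _
        · exact le_refl v0

lemma pvMinFold_cases (R C : Int) (cur : List (List Int)) :
    ∀ (L : List (Int × Int)) (v0 : Int), L.foldl (pvMinStep R C cur) v0 = v0 ∨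
      ∃ q ∈ L, (0 ≤ q.1 ∧ q.1 < R ∧ 0 ≤ q.2 ∧ q.2 < C ∧ (pvGet2 cur q.1 q.2).getD 0 ≠ 0) ∧
        L.foldl (pvMinStep R C cur) v0 = (pvGet2 cur q.1 q.2).getD 0 := by
  intro L
  induction L with
  | nil => intro v0; exact Or.inl rfl
  | cons q L ih =>
    intro v0
    rw [List.foldl_cons]
    by_cases hc : 0 ≤ q.1 ∧ q.1 < R ∧ 0 ≤ q.2 ∧ q.2 < C ∧ (pvGet2 cur q.1 q.2).getD 0 ≠ 0
    · have hstep : pvMinStep R C cur v0 q = min v0 ((pvGet2 cur q.1 q.2).getD 0) := by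
        unfold pvMinStep
        rw [if_pos hc]
      rw [hstep]
      rcases ih (min v0 ((pvGet2 cur q.1 q.2).getD 0)) with heq | ⟨q', hq', hc', heq⟩
      · rcases min_choice v0 ((pvGet2 cur q.1 q.2).getD 0) with hmin | hmin
        · exact Or.inl (by rw [heq, hmin])
        · exact Or.inr ⟨q, List.mem_cons_self, hc, by rw [heq, hmin]⟩
      · exact Or.inr ⟨q', List.mem_cons_of_mem _ hq', hc', heq⟩
    · have hstep : pvMinStep R C cur v0 q = v0 := by
        unfold pvMinStep
        rw [if_neg hc]
      rw [hstep]
      rcases ih v0 with heq | ⟨q', hq', hc', heq⟩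
      · exact Or.inl heq
      · exact Or.inr ⟨q', List.mem_cons_of_mem _ hq', hc', heq⟩

lemma pvMinFold_le_mem (R C : Int) (cur : List (List Int)) :
    ∀ (L : List (Int × Int)) (v0 : Int) (q : Int × Int), q ∈ L →
      (0 ≤ q.1 ∧ q.1 < R ∧ 0 ≤ q.2 ∧ q.2 < C ∧ (pvGet2 cur q.1 q.2).getD 0 ≠ 0) →
      L.foldl (pvMinStep R C cur) v0 ≤ (pvGet2 cur q.1 q.2).getD 0 := by
  intro L
  induction L with
  | nil => intro v0 q hq; exact absurd hq List.not_mem_nil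
  | cons q' L ih =>
    intro v0 q hq hc
    rw [List.foldl_cons]
    rcases List.mem_cons.1 hq with rfl | hq
    · have hstep : pvMinStep R C cur v0 q = min v0 ((pvGet2 cur q.1 q.2).getD 0) := by
        unfold pvMinStep
        rw [if_pos hc]
      calc L.foldl (pvMinStep R C cur) (pvMinStep R C cur v0 q) ≤ pvMinStep R C cur v0 q :=
            pvMinFold_le R C cur L _
      _ ≤ (pvGet2 cur q.1 q.2).getD 0 := by rw [hstep]; exact min_le_right _ _
    · exact ih _ q hq hc

lemma pvGet2_sweep {R C : Int} {cur : List (List Int)} {r c : Int}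
    (h1 : 0 ≤ r) (h2 : r < R) (h3 : 0 ≤ c) (h4 : c < C) :
    pvGet2 (pvSweep R C cur) r c = some (
      if (pvGet2 cur r c).getD 0 ≠ 0 then
        (pvNbrs r c).foldl (pvMinStep R C cur) ((pvGet2 cur r c).getD 0)
      else (pvGet2 cur r c).getD 0) := by
  exact pvGet2_build
    (fun r c =>
      if (pvGet2 cur r c).getD 0 ≠ 0 then
        (pvNbrs r c).foldl (pvMinStep R C cur) ((pvGet2 cur r c).getD 0)
      else (pvGet2 cur r c).getD 0) h1 h2 h3 h4

lemma pvSweep_dims (R C : Int) (cur : List (List Int)) : pvDims R C (pvSweep R C cur) :=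
  pvBuild_dims R C _

lemma pvAdj_mem_nbrs {p q : Int × Int} (h : pvAdj p q) : q ∈ pvNbrs p.1 p.2 := h

lemma pvSweep_invB {R C : Int} {grids : List (List String)} {cur : List (List Int)}
    (h : pvInvB R C grids cur) : pvInvB R C grids (pvSweep R C cur) := by
  obtain ⟨hdims, hex, hub, hw⟩ := h
  refine ⟨pvSweep_dims R C cur, ?_, ?_, ?_⟩
  · intro p hp
    obtain ⟨m, hm, hval⟩ := hex p hp
    have hpos : 1 ≤ pvIdx0 C m := pvIdx0_pos (pvGood_mem_cells (pvGood_of_reach hm))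
    have hgd : (pvGet2 cur p.1 p.2).getD 0 = pvIdx0 C m := by rw [hval]; rfl
    rw [pvGet2_sweep hp.1 hp.2.1 hp.2.2.1 hp.2.2.2.1, hgd]
    rw [if_pos (by omega : pvIdx0 C m ≠ 0)]
    rcases pvMinFold_cases R C cur (pvNbrs p.1 p.2) (pvIdx0 C m) with heq | ⟨q, hq, hc, heq⟩
    · exact ⟨m, hm, by rw [heq]⟩
    · -- the minimum came from a neighbour q
      obtain ⟨w, hwv⟩ := pvGet2_total hdims hc.1 hc.2.1 hc.2.2.1 hc.2.2.2.1
      have hwne : w ≠ 0 := by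
        intro h0
        apply hc.2.2.2.2
        rw [hwv, h0]
        rfl
      have hgq : pvGood R C grids q := by
        by_contra hng
        have := hw q.1 q.2 hc.1 hc.2.1 hc.2.2.1 hc.2.2.2.1 (by
          intro hgg
          exact hng (by rcases q with ⟨a, b⟩; exact hgg))
        rw [hwv] at this
        exact hwne (Option.some_inj.1 this)
      obtain ⟨m', hm', hval'⟩ := hex q hgq
      refine ⟨m', pvReach_trans (pvReach_tail (pvReach_refl hp) ⟨hp, hgq, hq⟩) hm', ?_⟩
      rw [heq, hwv] at *
      rw [hwv] at hval'
      have : w = pvIdx0 C m' := Option.some_inj.1 hval'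
      simp [this]
  · intro p v hp hv
    obtain ⟨m, hm, hval⟩ := hex p hp
    have hgd : (pvGet2 cur p.1 p.2).getD 0 = pvIdx0 C m := by rw [hval]; rfl
    rw [pvGet2_sweep hp.1 hp.2.1 hp.2.2.1 hp.2.2.2.1, hgd] at hv
    have hpos : 1 ≤ pvIdx0 C m := pvIdx0_pos (pvGood_mem_cells (pvGood_of_reach hm))
    rw [if_pos (by omega : pvIdx0 C m ≠ 0)] at hv
    have hv' := Option.some_inj.1 hv
    have hle := pvMinFold_le R C cur (pvNbrs p.1 p.2) (pvIdx0 C m)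
    have hub' := hub p (pvIdx0 C m) hp hval
    omega
  · intro r c hr hrR hc hcC hng
    have hz := hw r c hr hrR hc hcC hng
    have hgd : (pvGet2 cur r c).getD 0 = 0 := by rw [hz]; rfl
    rw [pvGet2_sweep hr hrR hc hcC, hgd]
    rw [if_neg (by omega : ¬ (0:Int) ≠ 0)]

lemma pvSweep_le {R C : Int} {grids : List (List String)} {cur : List (List Int)}
    (_h : pvInvB R C grids cur) {r c : Int}
    (h1 : 0 ≤ r) (h2 : r < R) (h3 : 0 ≤ c) (h4 : c < C) {v w : Int}
    (hv : pvGet2 (pvSweep R C cur) r c = some v) (hw : pvGet2 cur r c = some w) : v ≤ w := by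
  rw [pvGet2_sweep h1 h2 h3 h4] at hv
  have hgd : (pvGet2 cur r c).getD 0 = w := by rw [hw]; rfl
  rw [hgd] at hv
  have hv' := Option.some_inj.1 hv
  by_cases hz : w ≠ 0
  · rw [if_pos hz] at hv'
    have := pvMinFold_le R C cur (pvNbrs r c) w
    omega
  · rw [if_neg hz] at hv'
    omega

-- ---------- the sweep loop reaches a fixpoint: sum of entries decreases ----------
lemma pvSum1_le : ∀ (xs ys : List Int), ys.length = xs.length →
    (∀ (i : Nat) (v w : Int), ys[i]? = some v → xs[i]? = some w → v ≤ w ∧ 0 ≤ v) →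
    (ys.map Int.toNat).sum ≤ (xs.map Int.toNat).sum ∧
      ((ys.map Int.toNat).sum = (xs.map Int.toNat).sum → ys = xs) := by
  intro xs
  induction xs with
  | nil =>
    intro ys hlen _
    have : ys = [] := List.eq_nil_of_length_eq_zero (by simpa using hlen)
    subst this
    exact ⟨le_refl _, fun _ => rfl⟩
  | cons x xs ih =>
    intro ys hlen hle
    match ys, hlen with
    | y :: ys', hlen =>
      have hlen' : ys'.length = xs.length := by simpa using hlen
      obtain ⟨hhd, hhdnn⟩ := hle 0 y x (by simp) (by simp)
      obtain ⟨hsle, hseq⟩ := ih ys' hlen'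
        (fun i v w hv hw => hle (i + 1) v w (by simpa using hv) (by simpa using hw))
      simp only [List.map_cons, List.sum_cons]
      constructor
      · have : y.toNat ≤ x.toNat := by omega
        omega
      · intro hsum
        have h1 : y.toNat ≤ x.toNat := by omega
        have h2 : y.toNat = x.toNat := by omega
        have h3 : (ys'.map Int.toNat).sum = (xs.map Int.toNat).sum := by omega
        have : y = x := by omega
        rw [this, hseq h3]

lemma pvSum2_le : ∀ (g g' : List (List Int)), g'.length = g.length →
    (∀ (i : Nat) (row row' : List Int), g[i]? = some row → g'[i]? = some row' →
      row'.length = row.length ∧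
      (∀ (j : Nat) (v w : Int), row'[j]? = some v → row[j]? = some w → v ≤ w ∧ 0 ≤ v)) →
    pvSumNat g' ≤ pvSumNat g ∧ (pvSumNat g' = pvSumNat g → g' = g) := by
  intro g
  induction g with
  | nil =>
    intro g' hlen _
    have : g' = [] := List.eq_nil_of_length_eq_zero (by simpa using hlen)
    subst this
    exact ⟨le_refl _, fun _ => rfl⟩
  | cons row g ih =>
    intro g' hlen hrows
    match g', hlen with
    | row' :: g'', hlen =>
      have hlen' : g''.length = g.length := by simpa using hlen
      obtain ⟨hrlen, hrval⟩ := hrows 0 row row' (by simp) (by simp)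
      obtain ⟨hrle, hreq⟩ := pvSum1_le row row' hrlen hrval
      obtain ⟨hsle, hseq⟩ := ih g'' hlen'
        (fun i r r' hr hr' => hrows (i + 1) r r' (by simpa using hr) (by simpa using hr'))
      have hPg : pvSumNat g'' = (g''.map (fun row => (row.map Int.toNat).sum)).sum := rfl
      have hPg' : pvSumNat g = (g.map (fun row => (row.map Int.toNat).sum)).sum := rfl
      unfold pvSumNat
      simp only [List.map_cons, List.sum_cons]
      constructor
      · omega
      · intro hsum
        have h2 : (row'.map Int.toNat).sum = (row.map Int.toNat).sum := by omega
        rw [hreq h2, hseq (by omega)]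

lemma pvInvB_nonneg {R C : Int} {grids : List (List String)} {cur : List (List Int)}
    (h : pvInvB R C grids cur) {r c v : Int}
    (h1 : 0 ≤ r) (h2 : r < R) (h3 : 0 ≤ c) (h4 : c < C)
    (hv : pvGet2 cur r c = some v) : 0 ≤ v := by
  by_cases hg : pvGood R C grids (r, c)
  · have := pvInvB_pos h hg hv
    omega
  · have := h.2.2.2 r c h1 h2 h3 h4 hg
    rw [hv] at this
    have := Option.some_inj.1 this
    omega

lemma pvSweep_decrease {R C : Int} {grids : List (List String)} {cur : List (List Int)}
    (h : pvInvB R C grids cur) (hne : pvSweep R C cur ≠ cur) :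
    pvSumNat (pvSweep R C cur) < pvSumNat cur := by
  have hdims := h.1
  have hdims' := pvSweep_dims R C cur
  have hlen : (pvSweep R C cur).length = cur.length := by rw [hdims'.1, hdims.1]
  have hmain := pvSum2_le cur (pvSweep R C cur) hlen (by
    intro i row row' hrow hrow'
    have hi : i < cur.length := by
      by_contra hni
      rw [List.getElem?_eq_none_iff.2 (by omega)] at hrow
      exact absurd hrow.symm (Option.some_ne_none _)
    have hi' : i < (pvSweep R C cur).length := by omega
    have hrowe : cur[i] = row := by
      rw [List.getElem?_eq_getElem hi] at hrow
      exact Option.some_inj.1 hrow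
    have hrowe' : (pvSweep R C cur)[i] = row' := by
      rw [List.getElem?_eq_getElem hi'] at hrow'
      exact Option.some_inj.1 hrow'
    have hrl : row.length = C.toNat := hrowe ▸ hdims.2 _ (List.getElem_mem hi)
    have hrl' : row'.length = C.toNat := hrowe' ▸ hdims'.2 _ (List.getElem_mem hi')
    refine ⟨by omega, ?_⟩
    intro j v w hv hw
    have hj : j < row'.length := by
      by_contra hnj
      rw [List.getElem?_eq_none_iff.2 (by omega)] at hv
      exact absurd hv.symm (Option.some_ne_none _)
    have hiR : (i : Int) < R := by have := hdims.1; omega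
    have hjC : (j : Int) < C := by omega
    have hget : pvGet2 cur (i : Int) (j : Int) = some w := by
      rw [pvGet2_nonneg_eq cur (Int.natCast_nonneg i) (Int.natCast_nonneg j)]
      simp only [Int.toNat_natCast]
      rw [hrow]
      simpa using hw
    have hget' : pvGet2 (pvSweep R C cur) (i : Int) (j : Int) = some v := by
      rw [pvGet2_nonneg_eq _ (Int.natCast_nonneg i) (Int.natCast_nonneg j)]
      simp only [Int.toNat_natCast]
      rw [hrow']
      simpa using hv
    constructor
    · exact pvSweep_le h (Int.natCast_nonneg i) hiR (Int.natCast_nonneg j) hjC hget' hget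
    · exact pvInvB_nonneg (pvSweep_invB h) (Int.natCast_nonneg i) hiR (Int.natCast_nonneg j)
        hjC hget')
  rcases lt_or_eq_of_le hmain.1 with hlt | heq
  · exact hlt
  · exact absurd (hmain.2 heq) hne

lemma pvPropagate_spec {R C : Int} {grids : List (List String)} :
    ∀ (fuel : Nat) (cur : List (List Int)), pvInvB R C grids cur → pvSumNat cur < fuel →
      pvInvB R C grids (pvPropagate R C fuel cur) ∧
        pvSweep R C (pvPropagate R C fuel cur) = pvPropagate R C fuel cur := by
  intro fuel
  induction fuel with
  | zero => intro cur _ hf; omega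
  | succ fuel ih =>
    intro cur hinv hf
    show pvInvB R C grids (pvPropagate R C (fuel + 1) cur) ∧ _
    have hred : pvPropagate R C (fuel + 1) cur =
        if (pvSweep R C cur) = cur then cur else pvPropagate R C fuel (pvSweep R C cur) := rfl
    by_cases hfix : pvSweep R C cur = cur
    · rw [hred, if_pos hfix]
      exact ⟨hinv, hfix⟩
    · rw [hred, if_neg hfix]
      have hdec := pvSweep_decrease hinv hfix
      exact ih (pvSweep R C cur) (pvSweep_invB hinv) (by omega)

-- ---------- at the fixpoint every island cell holds its component minimum ----------
lemma pvFix_adj_le {R C : Int} {grids : List (List String)} {cur : List (List Int)}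
    (hinv : pvInvB R C grids cur) (hfix : pvSweep R C cur = cur)
    {p q : Int × Int} (hp : pvGood R C grids p) (hq : pvGood R C grids q) (hadj : pvAdj p q)
    {v w : Int} (hv : pvGet2 cur p.1 p.2 = some v) (hw : pvGet2 cur q.1 q.2 = some w) :
    v ≤ w := by
  have hv' : pvGet2 (pvSweep R C cur) p.1 p.2 = some v := by rw [hfix]; exact hv
  rw [pvGet2_sweep hp.1 hp.2.1 hp.2.2.1 hp.2.2.2.1] at hv'
  have hgd : (pvGet2 cur p.1 p.2).getD 0 = v := by rw [hv]; rfl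
  rw [hgd] at hv'
  have hvpos : 1 ≤ v := pvInvB_pos hinv hp hv
  rw [if_pos (by omega : v ≠ 0)] at hv'
  have hfold := Option.some_inj.1 hv'
  have hwgd : (pvGet2 cur q.1 q.2).getD 0 = w := by rw [hw]; rfl
  have hwpos : 1 ≤ w := pvInvB_pos hinv hq hw
  have := pvMinFold_le_mem R C cur (pvNbrs p.1 p.2) v q (pvAdj_mem_nbrs hadj)
    ⟨hq.1, hq.2.1, hq.2.2.1, hq.2.2.2.1, by omega⟩
  rw [hwgd] at this
  omega

lemma pvFix_reach_eq {R C : Int} {grids : List (List String)} {cur : List (List Int)}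
    (hinv : pvInvB R C grids cur) (hfix : pvSweep R C cur = cur)
    {p q : Int × Int} (hre : pvReach R C grids p q)
    {v : Int} (hv : pvGet2 cur p.1 p.2 = some v) :
    ∀ w : Int, pvGet2 cur q.1 q.2 = some w → v = w := by
  rcases hre with ⟨hgp, rtg⟩
  induction rtg with
  | refl => intro w hw; rw [hv] at hw; exact Option.some_inj.1 hw
  | @tail b q hbc hstep ih2 =>
    intro w hw
    have hgb : pvGood R C grids b := hstep.1
    obtain ⟨u, hu⟩ := pvGet2_total hinv.1 hgb.1 hgb.2.1 hgb.2.2.1 hgb.2.2.2.1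
    have h1 : v = u := ih2 u hu
    have h2 : u ≤ w := pvFix_adj_le hinv hfix hgb hstep.2.1 hstep.2.2 hu hw
    have h3 : w ≤ u := pvFix_adj_le hinv hfix hstep.2.1 hgb (pvAdj_symm hstep.2.2) hw hu
    omega

lemma pvFix_val {R C : Int} {grids : List (List String)} {cur : List (List Int)}
    (hinv : pvInvB R C grids cur) (hfix : pvSweep R C cur = cur)
    {p : Int × Int} (hp : pvGood R C grids p) :
    pvGet2 cur p.1 p.2 = some (pvCompMin R C grids p) := by
  obtain ⟨m, hm, hval⟩ := pvCompMin_mem hp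
  have hgm := pvGood_of_reach hm
  obtain ⟨v, hv⟩ := pvGet2_total hinv.1 hp.1 hp.2.1 hp.2.2.1 hp.2.2.2.1
  obtain ⟨w, hw⟩ := pvGet2_total hinv.1 hgm.1 hgm.2.1 hgm.2.2.1 hgm.2.2.2.1
  have hvw : v = w := pvFix_reach_eq hinv hfix hm hv w hw
  have hub : w ≤ pvIdx0 C m := hinv.2.2.1 m w hgm hw
  obtain ⟨m', hm', hval'⟩ := hinv.2.1 m hgm
  rw [hw] at hval'
  have hwm' : w = pvIdx0 C m' := Option.some_inj.1 hval'
  have hlb : pvCompMin R C grids m ≤ pvIdx0 C m' := pvCompMin_le hm'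
  have hmins : pvCompMin R C grids m = pvCompMin R C grids p := (pvCompMin_congr hm).symm
  have : v = pvCompMin R C grids p := by omega
  rw [hv, this]

lemma pvInvB_init (R C : Int) (grids : List (List String)) :
    pvInvB R C grids ((PySem.List.pyRange 0 R 1).map (fun r =>
      (PySem.List.pyRange 0 C 1).map (fun c =>
        if pvGet2 grids r c = some "X" then r * C + c + 1 else 0))) := by
  refine ⟨pvBuild_dims R C _, ?_, ?_, ?_⟩
  · intro p hp
    refine ⟨p, pvReach_refl hp, ?_⟩
    rw [pvGet2_build _ hp.1 hp.2.1 hp.2.2.1 hp.2.2.2.1]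
    rw [if_pos hp.2.2.2.2]
    rfl
  · intro p v hp hv
    rw [pvGet2_build _ hp.1 hp.2.1 hp.2.2.1 hp.2.2.2.1, if_pos hp.2.2.2.2] at hv
    have := Option.some_inj.1 hv
    rw [pvIdx0_rc]
    omega
  · intro r c hr hrR hc hcC hng
    rw [pvGet2_build _ hr hrR hc hcC]
    rw [if_neg (fun hx => hng ⟨hr, hrR, hc, hcC, hx⟩)]

-- ---------- B's row-major relabelling pass ----------
def pvInvD (R C : Int) (grids : List (List String)) (t : Int) (d : PySem.Dict Int Int) : Prop :=
  (∀ p : Int × Int, pvGood R C grids p → pvCompMin R C grids p ≤ t →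
    d.get? (pvCompMin R C grids p) = some (pvRank R C grids p)) ∧
  (∀ v : Int, d.contains v = true → ∃ p : Int × Int,
    pvGood R C grids p ∧ pvCompMin R C grids p = v ∧ v ≤ t) ∧
  ((d.size : Int) = ((pvCntLe R C grids t).card : Int))

lemma pvRank_eq_of_compMin {R C : Int} {grids : List (List String)} {p q : Int × Int}
    (h : pvCompMin R C grids p = pvCompMin R C grids q) :
    pvRank R C grids p = pvRank R C grids q := by
  unfold pvRank
  rw [h]

lemma pvInvD_step {R C : Int} {grids : List (List String)} {F : List (List Int)}
    (hFg : ∀ p : Int × Int, pvGood R C grids p →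
      pvGet2 F p.1 p.2 = some (pvCompMin R C grids p))
    (hFb : ∀ r c : Int, 0 ≤ r → r < R → 0 ≤ c → c < C → ¬ pvGood R C grids (r, c) →
      pvGet2 F r c = some 0)
    {r c : Int} (hr0 : 0 ≤ r) (hrR : r < R) (hc0 : 0 ≤ c) (hcC : c < C)
    {row : List Int} {d : PySem.Dict Int Int}
    (hd : pvInvD R C grids (r * C + c) d) :
    ∃ d', pvRelabelStep F r (row, d) c = (row ++ [pvCanonVal R C grids r c], d') ∧
      pvInvD R C grids (r * C + c + 1) d' := by
  obtain ⟨hd1, hd2, hd3⟩ := hd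
  have hin : ((r, c) : Int × Int) ∈ pvCells R C := mem_pvCells.2 ⟨hr0, hrR, hc0, hcC⟩
  by_cases hg : pvGood R C grids (r, c)
  · have hv : (pvGet2 F r c).getD 0 = pvCompMin R C grids (r, c) := by
      rw [hFg (r, c) hg]; rfl
    have hpos : 1 ≤ pvCompMin R C grids (r, c) := pvCompMin_pos hg
    have hminle := pvCompMin_le_self hg
    rw [pvIdx0_rc] at hminle
    by_cases hle : pvCompMin R C grids (r, c) ≤ r * C + c
    · -- component already labelled
      have hget := hd1 (r, c) hg hle
      refine ⟨d, ?_, ?_, ?_, ?_⟩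
      · unfold pvRelabelStep
        rw [hv]
        rw [if_pos (by omega : pvCompMin R C grids (r, c) ≠ 0), hget]
        rw [pvCanonVal_good hg]
      · intro p hp hple
        apply hd1 p hp
        rcases lt_or_eq_of_le hple with h' | h'
        · omega
        · exfalso
          obtain ⟨hreach, -⟩ := pvMinCellEq hp hin (by rw [pvIdx0_rc]; omega)
          rw [pvCompMin_congr hreach] at h'
          omega
      · intro v hvst
        obtain ⟨p, hp1, hp2, hp3⟩ := hd2 v hvst
        exact ⟨p, hp1, hp2, by omega⟩
      · rw [pvCntLe_step_none (by
          intro f hf heq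
          obtain ⟨hfg, hff⟩ := mem_pvFirsts.1 hf
          have : f = (r, c) := pvIdx0_inj (pvGood_mem_cells hfg) hin
            (by unfold pvIdx0 at heq ⊢; omega)
          subst this
          rw [← hff, heq] at hle
          unfold pvIdx0 at heq
          omega)]
        exact hd3
    · -- a new component is first seen here
      have hmineq : pvCompMin R C grids (r, c) = r * C + c + 1 := by omega
      have hfirst : pvIsFirst R C grids (r, c) := ⟨hg, by rw [pvIdx0_rc]; omega⟩
      have hnone : d.get? (pvCompMin R C grids (r, c)) = none := by
        rw [PySem.Dict.get?_eq_none_iff_contains]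
        by_contra hcont
        have : d.contains (pvCompMin R C grids (r, c)) = true := by
          cases hb : d.contains (pvCompMin R C grids (r, c))
          · exact absurd hb hcont
          · rfl
        obtain ⟨p, hp1, hp2, hp3⟩ := hd2 _ this
        omega
      have hrank : pvRank R C grids (r, c) = (d.size : Int) + 1 := by
        unfold pvRank
        rw [show pvCompMin R C grids (r, c) - 1 = r * C + c by omega, hd3]
        omega
      refine ⟨d.insert (pvCompMin R C grids (r, c)) ((d.size : Int) + 1), ?_, ?_, ?_, ?_⟩
      · unfold pvRelabelStep
        rw [hv]
        rw [if_pos (by omega : pvCompMin R C grids (r, c) ≠ 0), hnone]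
        rw [pvCanonVal_good hg, hrank]
      · intro p hp hple
        by_cases heq : pvCompMin R C grids p = pvCompMin R C grids (r, c)
        · rw [heq, PySem.Dict.get?_insert_self]
          rw [pvRank_eq_of_compMin heq, hrank]
        · rw [PySem.Dict.get?_insert_of_ne _ _ heq]
          apply hd1 p hp
          omega
      · intro v hvst
        rw [PySem.Dict.contains_insert] at hvst
        rcases Bool.or_eq_true_iff.1 hvst with hvv | hvold
        · have : v = pvCompMin R C grids (r, c) := by
            have := beq_iff_eq.1 hvv
            exact this
          exact ⟨(r, c), hg, by omega, by omega⟩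
        · obtain ⟨p, hp1, hp2, hp3⟩ := hd2 v hvold
          exact ⟨p, hp1, hp2, by omega⟩
      · have hcontf : d.contains (pvCompMin R C grids (r, c)) = false :=
          (PySem.Dict.get?_eq_none_iff_contains d _).1 hnone
        rw [PySem.Dict.size_insert, hcontf]
        obtain ⟨hgrow, hnotin⟩ := pvCntLe_step_some hfirst (by rw [pvIdx0_rc])
        rw [hgrow, Finset.card_insert_of_notMem hnotin]
        simp only [Bool.false_eq_true, if_false]
        push_cast
        omega
  · -- water cell: append 0
    have hv : (pvGet2 F r c).getD 0 = 0 := by rw [hFb r c hr0 hrR hc0 hcC hg]; rfl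
    refine ⟨d, ?_, ?_, ?_, ?_⟩
    · unfold pvRelabelStep
      rw [hv]
      rw [if_neg (by omega : ¬ (0:Int) ≠ 0)]
      rw [pvCanonVal_bad hg]
    · intro p hp hple
      apply hd1 p hp
      rcases lt_or_eq_of_le hple with h' | h'
      · omega
      · exfalso
        obtain ⟨-, hff⟩ := pvMinCellEq hp hin (by rw [pvIdx0_rc]; omega)
        exact hg hff.1
    · intro v hvst
      obtain ⟨p, hp1, hp2, hp3⟩ := hd2 v hvst
      exact ⟨p, hp1, hp2, by omega⟩
    · rw [pvCntLe_step_none (by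
        intro f hf heq
        obtain ⟨hfg, -⟩ := mem_pvFirsts.1 hf
        have : f = (r, c) := pvIdx0_inj (pvGood_mem_cells hfg) hin
          (by unfold pvIdx0 at heq ⊢; omega)
        exact hg (this ▸ hfg))]
      exact hd3

lemma pvRelabel_row {R C : Int} {grids : List (List String)} {F : List (List Int)}
    (hFg : ∀ p : Int × Int, pvGood R C grids p →
      pvGet2 F p.1 p.2 = some (pvCompMin R C grids p))
    (hFb : ∀ r c : Int, 0 ≤ r → r < R → 0 ≤ c → c < C → ¬ pvGood R C grids (r, c) →
      pvGet2 F r c = some 0)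
    {r : Int} (hr0 : 0 ≤ r) (hrR : r < R) :
    ∀ (n : Nat) (c0 : Int) (row : List Int) (d : PySem.Dict Int Int), c0 + n = C → 0 ≤ c0 →
      pvInvD R C grids (r * C + c0) d →
      ∃ d', (PySem.List.pyRange c0 C 1).foldl (pvRelabelStep F r) (row, d) =
          (row ++ (PySem.List.pyRange c0 C 1).map (fun c => pvCanonVal R C grids r c), d') ∧
        pvInvD R C grids (r * C + C) d' := by
  intro n
  induction n with
  | zero =>
    intro c0 row d hc0C hc00 hinv
    rw [PySem.List.pyRange_one_eq_nil (by omega : C ≤ c0)]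
    exact ⟨d, by simp, by rwa [show r * C + c0 = r * C + C by omega] at hinv⟩
  | succ n ih =>
    intro c0 row d hc0C hc00 hinv
    have hlt : c0 < C := by omega
    rw [PySem.List.pyRange_one_cons hlt, List.foldl_cons, List.map_cons]
    obtain ⟨d1, hstep, hinv1⟩ := pvInvD_step hFg hFb hr0 hrR hc00 hlt (row := row) hinv
    rw [hstep]
    obtain ⟨d', hrest, hinv'⟩ := ih (c0 + 1) (row ++ [pvCanonVal R C grids r c0]) d1
      (by omega) (by omega)
      (by rwa [show r * C + (c0 + 1) = r * C + c0 + 1 by ring])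
    refine ⟨d', ?_, hinv'⟩
    rw [hrest]
    simp

lemma pvRelabel_col {R C : Int} {grids : List (List String)} {F : List (List Int)}
    (hFg : ∀ p : Int × Int, pvGood R C grids p →
      pvGet2 F p.1 p.2 = some (pvCompMin R C grids p))
    (hFb : ∀ r c : Int, 0 ≤ r → r < R → 0 ≤ c → c < C → ¬ pvGood R C grids (r, c) →
      pvGet2 F r c = some 0)
    (hC : 0 < C) :
    ∀ (n : Nat) (r0 : Int) (acc : List (List Int)) (d : PySem.Dict Int Int),
      r0 + n = R → 0 ≤ r0 → pvInvD R C grids (r0 * C) d →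
      ∃ d', (PySem.List.pyRange r0 R 1).foldl (pvRelabelRow C F) (acc, d) =
        (acc ++ (PySem.List.pyRange r0 R 1).map
          (fun r => (PySem.List.pyRange 0 C 1).map (fun c => pvCanonVal R C grids r c)), d') ∧
        pvInvD R C grids (R * C) d' := by
  intro n
  induction n with
  | zero =>
    intro r0 acc d hr0R hr00 hinv
    rw [PySem.List.pyRange_one_eq_nil (by omega : R ≤ r0)]
    refine ⟨d, by simp, ?_⟩
    rwa [show r0 * C = R * C by rw [show r0 = R by omega]] at hinv
  | succ n ih =>
    intro r0 acc d hr0R hr00 hinv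
    have hlt : r0 < R := by omega
    rw [PySem.List.pyRange_one_cons hlt, List.foldl_cons, List.map_cons]
    obtain ⟨d1, hrow, hinv1⟩ := pvRelabel_row hFg hFb hr00 hlt C.toNat 0 [] d
      (by omega) (le_refl 0) (by rwa [add_zero])
    have hhead : pvRelabelRow C F (acc, d) r0 =
        (acc ++ [(PySem.List.pyRange 0 C 1).map (fun c => pvCanonVal R C grids r0 c)], d1) := by
      show ((acc, d).1 ++
          [((PySem.List.pyRange 0 C 1).foldl (pvRelabelStep F r0) ([], (acc, d).2)).1],
        ((PySem.List.pyRange 0 C 1).foldl (pvRelabelStep F r0) ([], (acc, d).2)).2) = _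
      rw [show ((acc, d).2 : PySem.Dict Int Int) = d from rfl, hrow]
      simp
    rw [hhead]
    obtain ⟨d', hrest, hinv'⟩ := ih (r0 + 1)
      (acc ++ [(PySem.List.pyRange 0 C 1).map (fun c => pvCanonVal R C grids r0 c)]) d1
      (by omega) (by omega)
      (by rwa [show (r0 + 1) * C = r0 * C + C by ring])
    refine ⟨d', ?_, hinv'⟩
    rw [hrest]
    simp

theorem pvB_eq (R C : Int) (grids : List (List String)) :
    label_islands_alt R C grids = (pvCanonGrid R C grids, ((pvFirsts R C grids).card : Int)) := by
  by_cases hR : R ≤ 0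
  · rw [pvFirsts_empty_of_degenerate (Or.inl hR)]
    have hnil : PySem.List.pyRange 0 R 1 = [] := PySem.List.pyRange_one_eq_nil (by omega)
    simp only [label_islands_alt, pvCanonGrid, hnil, List.map_nil, List.foldl_nil]
    simp
  by_cases hC : C ≤ 0
  · rw [pvFirsts_empty_of_degenerate (Or.inr hC)]
    have hnil : PySem.List.pyRange 0 C 1 = [] := PySem.List.pyRange_one_eq_nil (by omega)
    have hsweepN : pvSweep R C ((PySem.List.pyRange 0 R 1).map (fun _ => ([] : List Int))) =
        (PySem.List.pyRange 0 R 1).map (fun _ => ([] : List Int)) := by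
      unfold pvSweep
      rw [hnil]
      simp
    have hsumN : pvSumNat ((PySem.List.pyRange 0 R 1).map (fun _ => ([] : List Int))) = 0 := by
      unfold pvSumNat
      simp
    have hpropN : pvPropagate R C (pvSumNat ((PySem.List.pyRange 0 R 1).map
          (fun _ => ([] : List Int))) + 1)
        ((PySem.List.pyRange 0 R 1).map (fun _ => ([] : List Int))) =
        (PySem.List.pyRange 0 R 1).map (fun _ => ([] : List Int)) := by
      rw [hsumN]
      show (if pvSweep R C _ = _ then _ else _) = _
      rw [if_pos hsweepN]
    have hcur0 : ((PySem.List.pyRange 0 R 1).map (fun r =>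
        (PySem.List.pyRange 0 C 1).map (fun c =>
          if pvGet2 grids r c = some "X" then r * C + c + 1 else 0))) =
        (PySem.List.pyRange 0 R 1).map (fun _ => ([] : List Int)) := by
      rw [hnil]
      simp
    have hrl : pvRelabelRow C ((PySem.List.pyRange 0 R 1).map (fun _ => ([] : List Int))) =
        fun (st : List (List Int) × PySem.Dict Int Int) (_ : Int) =>
          (st.1 ++ [([] : List Int)], st.2) := by
      funext st r
      unfold pvRelabelRow
      rw [hnil, List.foldl_nil]
    have hval : label_islands_alt R C grids =
        (((PySem.List.pyRange 0 R 1).foldl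
          (pvRelabelRow C (pvPropagate R C (pvSumNat ((PySem.List.pyRange 0 R 1).map (fun r =>
            (PySem.List.pyRange 0 C 1).map (fun c =>
              if pvGet2 grids r c = some "X" then r * C + c + 1 else 0))) + 1)
            ((PySem.List.pyRange 0 R 1).map (fun r =>
              (PySem.List.pyRange 0 C 1).map (fun c =>
                if pvGet2 grids r c = some "X" then r * C + c + 1 else 0)))))
          (([] : List (List Int)), PySem.Dict.empty)).1,
         (((PySem.List.pyRange 0 R 1).foldl
          (pvRelabelRow C (pvPropagate R C (pvSumNat ((PySem.List.pyRange 0 R 1).map (fun r =>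
            (PySem.List.pyRange 0 C 1).map (fun c =>
              if pvGet2 grids r c = some "X" then r * C + c + 1 else 0))) + 1)
            ((PySem.List.pyRange 0 R 1).map (fun r =>
              (PySem.List.pyRange 0 C 1).map (fun c =>
                if pvGet2 grids r c = some "X" then r * C + c + 1 else 0)))))
          (([] : List (List Int)), PySem.Dict.empty)).2.size : Int)) := rfl
    rw [hval, hcur0, hpropN, hrl]
    rw [PySem.List.foldl_prod_mk (f := fun (s1 : List (List Int)) (_ : Int) => s1 ++ [([] : List Int)])
      (g := fun (s2 : PySem.Dict Int Int) (_ : Int) => s2)]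
    rw [PySem.List.foldl_append_singleton_eq_map, PySem.List.foldl_ignore]
    unfold pvCanonGrid
    rw [hnil]
    simp
  · have hC' : 0 < C := by omega
    have hR' : 0 < R := by omega
    have hinv0 := pvInvB_init R C grids
    obtain ⟨hinvF, hfix⟩ := pvPropagate_spec
      (pvSumNat ((PySem.List.pyRange 0 R 1).map (fun r =>
        (PySem.List.pyRange 0 C 1).map (fun c =>
          if pvGet2 grids r c = some "X" then r * C + c + 1 else 0))) + 1) _ hinv0 (by omega)
    have hFg : ∀ p : Int × Int, pvGood R C grids p →
        pvGet2 (pvPropagate R C (pvSumNat ((PySem.List.pyRange 0 R 1).map (fun r =>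
          (PySem.List.pyRange 0 C 1).map (fun c =>
            if pvGet2 grids r c = some "X" then r * C + c + 1 else 0))) + 1)
          ((PySem.List.pyRange 0 R 1).map (fun r =>
            (PySem.List.pyRange 0 C 1).map (fun c =>
              if pvGet2 grids r c = some "X" then r * C + c + 1 else 0)))) p.1 p.2 =
        some (pvCompMin R C grids p) :=
      fun p hp => pvFix_val hinvF hfix hp
    have hFb := hinvF.2.2.2
    have hd0 : pvInvD R C grids 0 PySem.Dict.empty := by
      refine ⟨?_, ?_, ?_⟩
      · intro p hp hle
        have := pvCompMin_pos hp
        omega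
      · intro v hv
        rw [PySem.Dict.contains_empty] at hv
        exact absurd hv (by simp)
      · have : pvCntLe R C grids 0 = ∅ := by
          apply Finset.eq_empty_of_forall_notMem
          intro f hf
          rw [mem_pvCntLe] at hf
          have := pvIdx0_pos (pvGood_mem_cells (mem_pvFirsts.1 hf.1).1)
          omega
        rw [this, PySem.Dict.size_empty]
        simp
    obtain ⟨d', hfold, hinvD'⟩ := pvRelabel_col hFg hFb hC' R.toNat 0 [] PySem.Dict.empty
      (by omega) (le_refl 0) (by rw [zero_mul]; exact hd0)
    have hval : label_islands_alt R C grids =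
        (((PySem.List.pyRange 0 R 1).foldl
          (pvRelabelRow C (pvPropagate R C (pvSumNat ((PySem.List.pyRange 0 R 1).map (fun r =>
            (PySem.List.pyRange 0 C 1).map (fun c =>
              if pvGet2 grids r c = some "X" then r * C + c + 1 else 0))) + 1)
            ((PySem.List.pyRange 0 R 1).map (fun r =>
              (PySem.List.pyRange 0 C 1).map (fun c =>
                if pvGet2 grids r c = some "X" then r * C + c + 1 else 0)))))
          (([] : List (List Int)), PySem.Dict.empty)).1,
         (((PySem.List.pyRange 0 R 1).foldl
          (pvRelabelRow C (pvPropagate R C (pvSumNat ((PySem.List.pyRange 0 R 1).map (fun r =>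
            (PySem.List.pyRange 0 C 1).map (fun c =>
              if pvGet2 grids r c = some "X" then r * C + c + 1 else 0))) + 1)
            ((PySem.List.pyRange 0 R 1).map (fun r =>
              (PySem.List.pyRange 0 C 1).map (fun c =>
                if pvGet2 grids r c = some "X" then r * C + c + 1 else 0)))))
          (([] : List (List Int)), PySem.Dict.empty)).2.size : Int)) := rfl
    rw [hval, hfold]
    simp only [List.nil_append]
    rw [Prod.ext_iff]
    refine ⟨rfl, ?_⟩
    show ((d'.size : Nat) : Int) = _
    rw [hinvD'.2.2, pvCntLe_all]
-- ===== VERDICT (by name: the statement is the Claim_ definition above) =====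
theorem label_islands_spec : Claim_equal_label_islands := by
  intro R C grids _ _
  unfold Spec_label_islands
  rw [pvA_eq, pvB_eq]
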